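-- pv_equiv track=rewrite | github.com/codyarvonen/Keystroke-Inference | utils/keystroke.py | remove_sync_artifacts
-- ===== SOURCE A (Python) =====
-- from typing import Any, Dict, List
--
-- def remove_sync_artifacts(events: List[Dict[str, Any]]) -> List[Dict[str, Any]]:
--     """Remove time-sync l/r patterns from start, end, and middle of event list."""
--     if len(events) < 10:
--         return events
--
--     # Handle sync patterns at the very start
--     start_pattern: List[str] = []
--     for i in range(min(20, len(events))):
--         key = events[i]["key"]
--         if key in ("l", "r"):
--             start_pattern.append(key)
--         else:
--             break
--
--     if len(start_pattern) >= 4 and all(k in ("l", "r") for k in start_pattern):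
--         events = events[len(start_pattern):]
--
--     # Handle sync patterns at the very end (with optional Ctrl+C)
--     control_c_start = None
--     for i in range(len(events) - 1, max(len(events) - 10, -1), -1):
--         key = events[i]["key"]
--         if key in ("Key.ctrl", "Key.control"):
--             if i + 1 < len(events) and events[i + 1]["key"] == "c":
--                 control_c_start = i
--                 break
--         elif key == "c" and i > 0 and events[i - 1]["key"] in ("Key.ctrl", "Key.control"):
--             control_c_start = i - 1
--             break
--
--     search_start = control_c_start if control_c_start is not None else len(events)
--     end_pattern: List[str] = []
--     pattern_start_idx = search_start
--
--     for i in range(search_start - 1, max(search_start - 30, -1), -1):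
--         key = events[i]["key"]
--         if key in ("l", "r"):
--             end_pattern.insert(0, key)
--             pattern_start_idx = i
--         else:
--             break
--
--     if len(end_pattern) >= 4 and all(k in ("l", "r") for k in end_pattern):
--         if control_c_start is not None:
--             events = events[:pattern_start_idx]
--     elif control_c_start is not None:
--         events = events[:control_c_start]
--
--     # Handle sync-like l/r bursts in the middle (runs of length >= 4)
--     cleaned: List[Dict[str, Any]] = []
--     i = 0
--     n = len(events)
--     while i < n:
--         if events[i]["key"] in ("l", "r"):
--             j = i
--             while j < n and events[j]["key"] in ("l", "r"):
--                 j += 1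
--             if j - i >= 4:
--                 i = j
--                 continue
--         cleaned.append(events[i])
--         i += 1
--
--     return cleaned
-- ===== SOURCE B (Python) =====
-- from typing import Any, Dict, List
--
--
-- def remove_sync_artifacts(events: List[Dict[str, Any]]) -> List[Dict[str, Any]]:
--     """Remove time-sync l/r patterns: one run-length table over the key sequence
--     drives all three phases, expressed as a kept index window [lo, hi) plus
--     per-run clipping of each run to that window."""
--     if len(events) < 10:
--         return events
--     n = len(events)
--     keys = [e["key"] for e in events]
--
--     # One run-length encoding of is_lr over the key sequence: (is_lr, start, length).
--     runs: List[tuple] = []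
--     i = 0
--     while i < n:
--         lr = keys[i] in ("l", "r")
--         j = i
--         while j < n and (keys[j] in ("l", "r")) == lr:
--             j += 1
--         runs.append((lr, i, j - i))
--         i = j
--
--     # Start phase: shrink the window from the left (first run, capped at 20).
--     lo = 0
--     if runs[0][0] and min(20, runs[0][2]) >= 4:
--         lo = min(20, runs[0][2])
--
--     # End phase: last Ctrl+C pair start in the search window, then shrink from
--     # the right, stripping the l/r run ending just before it (capped at 29).
--     hi = n
--     cc = None
--     for j in range(max(lo, n - 10), n - 1):
--         if keys[j] in ("Key.ctrl", "Key.control") and keys[j + 1] == "c":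
--             cc = j
--     if cc is not None:
--         tail = 0
--         for lr, s, ln in runs:
--             if lr and s <= cc - 1 < s + ln:
--                 tail = min(29, cc - max(s, lo))
--         hi = cc - (tail if tail >= 4 else 0)
--
--     # Middle phase: emit each run clipped to [lo, hi), unless it is a long l/r run.
--     out: List[Dict[str, Any]] = []
--     for lr, s, ln in runs:
--         a, b = max(s, lo), min(s + ln, hi)
--         if not (lr and b - a >= 4):
--             out.extend(events[a:b])
--     return out
-- ===== Notes on version B (the rewrite author's own statement) =====
-- stated objective: alternative
-- what changed: B replaces A's staged list-rewriting scans with a single run-length table of the l/r-ness of the key sequence plus index arithmetic: the start cut, the Ctrl+C tail cut and the middle collapse are all derived from that one table as a kept window [lo, hi) and per-run clipping, and the output is emitted in one pass over the runs without ever rebuilding intermediate event lists.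
import Mathlib
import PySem

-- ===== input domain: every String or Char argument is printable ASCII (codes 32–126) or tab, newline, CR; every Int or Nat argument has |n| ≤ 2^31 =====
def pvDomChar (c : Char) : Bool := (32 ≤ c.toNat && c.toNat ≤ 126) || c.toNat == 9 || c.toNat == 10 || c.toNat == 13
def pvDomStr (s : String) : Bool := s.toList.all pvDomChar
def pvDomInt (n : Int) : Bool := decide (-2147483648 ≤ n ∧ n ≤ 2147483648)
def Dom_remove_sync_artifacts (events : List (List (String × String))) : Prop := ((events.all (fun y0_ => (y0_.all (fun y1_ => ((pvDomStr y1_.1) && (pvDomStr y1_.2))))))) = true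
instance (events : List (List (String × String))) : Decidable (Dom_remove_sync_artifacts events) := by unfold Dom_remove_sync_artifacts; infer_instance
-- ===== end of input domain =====

-- B derives all three artifact-removal phases from one run-length table of the key
-- sequence (kept index window [lo, hi) plus per-run clipping, one emission pass)
-- instead of A's staged index-loop scans over rebuilt lists; objective: alternative
-- algorithm of the same cost.

-- shared dict/list access helpers (e["key"] and events[i]["key"])
def pvKey (e : List (String × String)) : String := (List.lookup "key" e).getD ""
def pvIsLRk (k : String) : Bool := k == "l" || k == "r"
def pvIsCtrlk (k : String) : Bool := k == "Key.ctrl" || k == "Key.control"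
-- events[i]["key"]
def pvKeyAt (evs : List (List (String × String))) (i : Int) : String :=
  pvKey ((PySem.List.pyGet? evs i).getD [])

-- ===== PORT A =====
-- for i in range(min(20, len(events))): collect key while in ("l","r") else break
def startLoopA (evs : List (List (String × String))) :
    List Int → List String → List String
  | [], acc => acc
  | i :: rest, acc =>
    let key := pvKeyAt evs i
    if pvIsLRk key then startLoopA evs rest (acc ++ [key]) else acc

-- for i in range(len-1, max(len-10,-1), -1): Ctrl+C detection with break
def ctrlLoopA (evs : List (List (String × String))) (n : Int) :
    List Int → Option Int
  | [] => none
  | i :: rest =>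
    let key := pvKeyAt evs i
    if pvIsCtrlk key then
      if decide (i + 1 < n) && (pvKeyAt evs (i + 1) == "c") then some i
      else ctrlLoopA evs n rest
    else if (key == "c") && decide (0 < i) && pvIsCtrlk (pvKeyAt evs (i - 1)) then some (i - 1)
    else ctrlLoopA evs n rest

-- for i in range(search_start-1, max(search_start-30,-1), -1): collect end_pattern, track idx
def endLoopA (evs : List (List (String × String))) :
    List Int → List String → Int → List String × Int
  | [], pat, idx => (pat, idx)
  | i :: rest, pat, idx =>
    let key := pvKeyAt evs i
    if pvIsLRk key then endLoopA evs rest (key :: pat) i else (pat, idx)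

-- inner: while j < n and events[j]["key"] in ("l","r"): j += 1   (fuel-bounded)
def midRunA (evs : List (List (String × String))) (n : Int) :
    Nat → Int → Int
  | 0, j => j
  | fuel + 1, j =>
    if decide (j < n) && pvIsLRk (pvKeyAt evs j) then midRunA evs n fuel (j + 1) else j

-- outer: while i < n with run-skip / append  (fuel-bounded; i strictly increases)
def midLoopA (evs : List (List (String × String))) (n : Int) :
    Nat → Int → List (List (String × String)) → List (List (String × String))
  | 0, _, acc => acc
  | fuel + 1, i, acc =>
    if i < n then
      if pvIsLRk (pvKeyAt evs i) then
        if 4 ≤ midRunA evs n fuel i - i then midLoopA evs n fuel (midRunA evs n fuel i) acc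
        else midLoopA evs n fuel (i + 1) (acc ++ [(PySem.List.pyGet? evs i).getD []])
      else midLoopA evs n fuel (i + 1) (acc ++ [(PySem.List.pyGet? evs i).getD []])
    else acc

def remove_sync_artifacts (events : List (List (String × String))) :
    List (List (String × String)) :=
  if events.length < 10 then events
  else
    let startPat := startLoopA events (PySem.List.pyRange 0 (min 20 (events.length : Int)) 1) []
    let events1 :=
      if decide (4 ≤ startPat.length) && startPat.all pvIsLRk then
        PySem.List.slice events (some (startPat.length : Int)) none
      else events
    let n : Int := events1.length
    let ccs := ctrlLoopA events1 n (PySem.List.pyRange (n - 1) (max (n - 10) (-1)) (-1))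
    let searchStart := match ccs with | some c => c | none => n
    let ep := endLoopA events1
      (PySem.List.pyRange (searchStart - 1) (max (searchStart - 30) (-1)) (-1)) [] searchStart
    let events2 :=
      if decide (4 ≤ ep.1.length) && ep.1.all pvIsLRk then
        match ccs with
        | some _ => PySem.List.slice events1 none (some ep.2)
        | none => events1
      else
        match ccs with
        | some c => PySem.List.slice events1 none (some c)
        | none => events1
    midLoopA events2 (events2.length : Int) (events2.length + 1) 0 []

-- ===== PORT B =====
-- keys[j] (list of strings; out-of-range yields the dummy "")
def keyAtS (keys : List String) (j : Int) : String :=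
  (PySem.List.pyGet? keys j).getD ""

-- inner: while j < n and (keys[j] in ("l","r")) == lr: j += 1   (fuel-bounded)
def rleRun (keys : List String) (n : Int) (lr : Bool) : Nat → Int → Int
  | 0, j => j
  | fuel + 1, j =>
    if decide (j < n) && (pvIsLRk (keyAtS keys j) == lr) then rleRun keys n lr fuel (j + 1)
    else j

-- outer: while i < n: find the run [i, j) of equal l/r-ness, append (lr, i, j - i)
def rleLoop (keys : List String) (n : Int) :
    Nat → Int → List (Bool × Int × Int) → List (Bool × Int × Int)
  | 0, _, acc => acc
  | fuel + 1, i, acc =>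
    if i < n then
      rleLoop keys n fuel (rleRun keys n (pvIsLRk (keyAtS keys i)) fuel i)
        (acc ++ [(pvIsLRk (keyAtS keys i), i,
                  rleRun keys n (pvIsLRk (keyAtS keys i)) fuel i - i)])
    else acc

def remove_sync_artifacts_alt (events : List (List (String × String))) :
    List (List (String × String)) :=
  if events.length < 10 then events
  else
    let n : Int := events.length
    let keys := events.map pvKey
    let runs := rleLoop keys n (events.length + 1) 0 []
    let r0 := (PySem.List.pyGet? runs 0).getD (false, 0, 0)
    let lo : Int := if r0.1 && decide (4 ≤ min 20 r0.2.2) then min 20 r0.2.2 else 0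
    let cc := (PySem.List.pyRange (max lo (n - 10)) (n - 1) 1).foldl
      (fun acc j =>
        if pvIsCtrlk (keyAtS keys j) && (keyAtS keys (j + 1) == "c") then some j else acc) none
    let hi : Int :=
      match cc with
      | none => n
      | some c =>
        let tail : Int := runs.foldl
          (fun acc r =>
            if r.1 && decide (r.2.1 ≤ c - 1) && decide (c - 1 < r.2.1 + r.2.2) then
              min 29 (c - max r.2.1 lo)
            else acc) 0
        c - (if 4 ≤ tail then tail else 0)
    runs.foldl
      (fun acc r =>
        if r.1 && decide (4 ≤ min (r.2.1 + r.2.2) hi - max r.2.1 lo) then acc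
        else acc ++ PySem.List.slice events (some (max r.2.1 lo)) (some (min (r.2.1 + r.2.2) hi)))
      []

-- ===== PRECONDITION & SPEC =====
-- Pre_ excludes exactly the inputs on which Python A raises KeyError: with ≥ 10 events the
-- function reads every event's "key" entry, so every event dict must contain the key "key".
def Pre_remove_sync_artifacts (events : List (List (String × String))) : Prop :=
  10 ≤ events.length → events.all (fun e => (List.lookup "key" e).isSome) = true
instance (events : List (List (String × String))) : Decidable (Pre_remove_sync_artifacts events) := by
  unfold Pre_remove_sync_artifacts; infer_instance

def pvWitness_remove_sync_artifacts : (List (List (String × String))) :=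
  [[("key", "a")], [("key", "l")], [("key", "r")], [("key", "b")], [("key", "c")],
   [("key", "a")], [("key", "l")], [("key", "r")], [("key", "b")], [("key", "c")]]

def Spec_remove_sync_artifacts (events : List (List (String × String)))
    (out : List (List (String × String))) : Prop :=
  out = remove_sync_artifacts_alt events
instance (events : List (List (String × String))) (out : List (List (String × String))) :
    Decidable (Spec_remove_sync_artifacts events out) := by
  unfold Spec_remove_sync_artifacts; infer_instance

-- ===== CLAIM (what is proved, stated in full; the proofs are below) =====
def Claim_equal_remove_sync_artifacts : Prop :=
  ∀ (events : List (List (String × String))), Dom_remove_sync_artifacts events →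
    Pre_remove_sync_artifacts events →
    Spec_remove_sync_artifacts events (remove_sync_artifacts events)

-- ===== LEMMAS AND PROOFS =====

-- pvIsLR e = (e["key"] in ("l","r"))
def pvIsLR (e : List (String × String)) : Bool := pvIsLRk (pvKey e)

-- ---- generic list helpers ----
theorem pv_head?_filter {α : Type} (p : α → Bool) :
    ∀ (l : List α), (l.filter p).head? = l.find? p := by
  intro l; induction l with
  | nil => rfl
  | cons a t ih => by_cases h : p a = true <;> simp [h, ih]

theorem pv_getLast?_filter {α : Type} (p : α → Bool) (l : List α) :
    (l.filter p).getLast? = l.reverse.find? p := by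
  rw [List.getLast?_eq_head?_reverse, ← List.filter_reverse, pv_head?_filter]

theorem pv_find?_congr {α : Type} (p q : α → Bool) :
    ∀ (l : List α), (∀ x ∈ l, p x = q x) → l.find? p = l.find? q := by
  intro l; induction l with
  | nil => intro _; rfl
  | cons a t ih =>
    intro h
    have ha := h a (by simp)
    by_cases hpa : p a = true
    · simp [hpa, ha ▸ hpa]
    · have hqa : ¬ q a = true := by rw [← ha]; exact hpa
      simp only [List.find?_cons, Bool.not_eq_true] at *
      simp [hpa, hqa, ih (fun x hx => h x (by simp [hx]))]

theorem pv_dropWhile_eq_drop {α : Type} (p : α → Bool) :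
    ∀ (l : List α), l.dropWhile p = l.drop (l.takeWhile p).length := by
  intro l; induction l with
  | nil => rfl
  | cons a t ih => by_cases h : p a = true <;> simp [h, ih]

theorem pv_take_min {α : Type} (k : Nat) (l : List α) :
    l.take (min k l.length) = l.take k := by
  by_cases h : l.length ≤ k
  · have : min k l.length = l.length := by omega
    rw [this, List.take_length, List.take_of_length_le h]
  · have : min k l.length = k := by omega
    rw [this]

theorem pv_take_takeWhile_len {α : Type} (p : α → Bool) :
    ∀ (l : List α), l.take (l.takeWhile p).length = l.takeWhile p := by
  intro l; induction l with
  | nil => rfl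
  | cons a t ih => by_cases h : p a = true <;> simp [h, ih]

theorem pv_takeWhile_take_len {α : Type} (p : α → Bool) :
    ∀ (l : List α) (m : Nat), ((l.take m).takeWhile p).length = min m (l.takeWhile p).length := by
  intro l; induction l with
  | nil => simp
  | cons a t ih =>
    intro m
    cases m with
    | zero => simp
    | succ m => by_cases h : p a = true <;> simp [h, ih] <;> omega

theorem pv_takeWhile_append_len {α : Type} (p : α → Bool) :
    ∀ (xs ys : List α),
      ((xs ++ ys).takeWhile p).length =
        if (xs.takeWhile p).length < xs.length then (xs.takeWhile p).length
        else xs.length + (ys.takeWhile p).length := by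
  intro xs; induction xs with
  | nil => intro ys; simp
  | cons a t ih =>
    intro ys
    by_cases h : p a = true
    · simp only [List.cons_append, List.takeWhile_cons, h, if_pos, List.length_cons, ih ys]
      by_cases h2 : (t.takeWhile p).length < t.length
      · rw [if_pos h2, if_pos (by omega)]
      · rw [if_neg h2, if_neg (by omega)]; omega
    · simp [List.takeWhile_cons, h]

-- ---- pyRange with step -1 ----
theorem pv_pyRangeN_nil {a b : Int} (h : a ≤ b) : PySem.List.pyRange a b (-1) = [] := by
  rw [PySem.List.pyRange_neg_one]
  have : (a - b).toNat = 0 := by omega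
  simp [this]

theorem pv_pyRangeN_cons {a b : Int} (h : b < a) :
    PySem.List.pyRange a b (-1) = a :: PySem.List.pyRange (a - 1) b (-1) := by
  rw [PySem.List.pyRange_neg_one, PySem.List.pyRange_neg_one]
  have h1 : (a - b).toNat = (a - 1 - b).toNat + 1 := by omega
  rw [h1, List.range_succ_eq_map]
  simp only [List.map_cons, List.map_map]
  congr 1
  · norm_num
  · apply List.map_congr_left; intro k _; simp only [Function.comp_apply]; push_cast; ring

theorem pv_pyRangeN_append {a b : Int} (h : b ≤ a) :
    PySem.List.pyRange a (b - 1) (-1) = PySem.List.pyRange a b (-1) ++ [b] := by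
  rw [PySem.List.pyRange_neg_one, PySem.List.pyRange_neg_one]
  have h1 : (a - (b - 1)).toNat = (a - b).toNat + 1 := by omega
  rw [h1, List.range_succ]
  simp only [List.map_append, List.map_cons, List.map_nil]
  congr 2
  omega

theorem pv_rev_pyRange : ∀ (d : Nat) (a b : Int), (b - a).toNat = d →
    (PySem.List.pyRange a b 1).reverse = PySem.List.pyRange (b - 1) (a - 1) (-1) := by
  intro d
  induction d with
  | zero =>
    intro a b hd
    rw [PySem.List.pyRange_one_eq_nil (by omega), pv_pyRangeN_nil (by omega)]
    rfl
  | succ d ih =>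
    intro a b hd
    have hab : a < b := by omega
    rw [PySem.List.pyRange_one_cons hab, List.reverse_cons, ih (a + 1) b (by omega),
        show (a + 1 - 1 : Int) = a by ring,
        show (a - 1 : Int) = a - 1 by ring,
        pv_pyRangeN_append (show a ≤ b - 1 by omega)]

theorem pv_pyRange_one_shift (c : Int) : ∀ (d : Nat) (a b : Int), (b - a).toNat = d →
    PySem.List.pyRange (c + a) (c + b) 1 = (PySem.List.pyRange a b 1).map (c + ·) := by
  intro d
  induction d with
  | zero =>
    intro a b hd
    rw [PySem.List.pyRange_one_eq_nil (by omega), PySem.List.pyRange_one_eq_nil (by omega)]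
    rfl
  | succ d ih =>
    intro a b hd
    rw [PySem.List.pyRange_one_cons (by omega : a < b),
        PySem.List.pyRange_one_cons (by omega : c + a < c + b), List.map_cons,
        show (c + a + 1 : Int) = c + (a + 1) by ring, ih (a + 1) b (by omega)]

-- ---- key access bridges ----
theorem pv_keyAt_nat (evs : List (List (String × String))) (i : Nat) (h : i < evs.length) :
    pvKeyAt evs (i : Int) = pvKey evs[i] := by
  unfold pvKeyAt
  rw [PySem.List.pyGet?_natCast, List.getElem?_eq_getElem h]
  rfl

theorem pv_evAt_nat (evs : List (List (String × String))) (i : Nat) (h : i < evs.length) :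
    (PySem.List.pyGet? evs (i : Int)).getD [] = evs[i] := by
  rw [PySem.List.pyGet?_natCast, List.getElem?_eq_getElem h]
  rfl

theorem pv_pyGet?_map {α β : Type} (f : α → β) (l : List α) (j : Int) :
    PySem.List.pyGet? (l.map f) j = (PySem.List.pyGet? l j).map f := by
  unfold PySem.List.pyGet?
  simp

theorem pv_keyAtS_eq (events : List (List (String × String))) (j : Int) :
    keyAtS (events.map pvKey) j = pvKeyAt events j := by
  unfold keyAtS pvKeyAt
  rw [pv_pyGet?_map]
  cases PySem.List.pyGet? events j with
  | none => rfl
  | some e => rfl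

-- ---- phase 1 (A): the start-pattern loop is a takeWhile ----
theorem pv_startLoopA_eq (evs : List (List (String × String))) :
    ∀ (d : Nat) (a b : Nat) (acc : List String), b - a = d → b ≤ evs.length →
    startLoopA evs (PySem.List.pyRange (a : Int) (b : Int) 1) acc
      = acc ++ (((evs.drop a).take (b - a)).takeWhile pvIsLR).map pvKey := by
  intro d
  induction d with
  | zero =>
    intro a b acc hd _
    rw [PySem.List.pyRange_one_eq_nil (by omega), hd]
    simp [startLoopA]
  | succ d ih =>
    intro a b acc hd hb
    have hab : (a : Int) < (b : Int) := by omega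
    have halen : a < evs.length := by omega
    rw [PySem.List.pyRange_one_cons hab]
    show startLoopA evs ((a : Int) :: PySem.List.pyRange ((a : Int) + 1) (b : Int) 1) acc = _
    rw [show ((a : Int) + 1) = ((a + 1 : Nat) : Int) by push_cast; ring]
    rw [List.drop_eq_getElem_cons halen, show b - a = (b - (a + 1)) + 1 by omega,
        List.take_succ_cons, List.takeWhile_cons]
    unfold startLoopA
    rw [pv_keyAt_nat evs a halen]
    by_cases hlr : pvIsLR evs[a] = true
    · have : pvIsLRk (pvKey evs[a]) = true := hlr
      rw [if_pos this, ih (a + 1) b (acc ++ [pvKey evs[a]]) (by omega) hb, if_pos hlr]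
      simp
    · have : ¬ pvIsLRk (pvKey evs[a]) = true := hlr
      rw [if_neg this, if_neg hlr]
      simp

theorem pv_startPat_eq (evs : List (List (String × String))) :
    startLoopA evs (PySem.List.pyRange 0 (min 20 (evs.length : Int)) 1) []
      = ((evs.take 20).takeWhile pvIsLR).map pvKey := by
  have h20 : (min 20 (evs.length : Int)) = ((min 20 evs.length : Nat) : Int) := by
    push_cast; omega
  rw [show (0 : Int) = ((0 : Nat) : Int) from rfl, h20,
      pv_startLoopA_eq evs (min 20 evs.length) 0 (min 20 evs.length) [] rfl (by omega)]
  rw [List.drop_zero, Nat.sub_zero, pv_take_min]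
  simp

-- ---- midList, the common shape of the middle pass ----
def midList : List (List (String × String)) → List (List (String × String))
  | [] => []
  | a :: rest =>
    if pvIsLR a then
      if 4 ≤ ((a :: rest).takeWhile pvIsLR).length then midList ((a :: rest).dropWhile pvIsLR)
      else a :: midList rest
    else a :: midList rest
termination_by l => l.length
decreasing_by
  · simp only [List.dropWhile_cons, *, if_pos]
    exact Nat.lt_succ_of_le (List.length_dropWhile_le _ _)
  · simp
  · simp

theorem pv_midRunA_eq (evs : List (List (String × String))) :
    ∀ (fuel : Nat) (j : Nat), j ≤ evs.length →
    ((evs.drop j).takeWhile pvIsLR).length ≤ fuel →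
    midRunA evs (evs.length : Int) fuel (j : Int)
      = (j : Int) + ((evs.drop j).takeWhile pvIsLR).length := by
  intro fuel
  induction fuel with
  | zero =>
    intro j _ hf
    unfold midRunA
    omega
  | succ fuel ih =>
    intro j hj hf
    unfold midRunA
    by_cases hlt : j < evs.length
    · have hdrop := List.drop_eq_getElem_cons hlt
      by_cases hlr : pvIsLRk (pvKey evs[j]) = true
      · have htw : (evs.drop j).takeWhile pvIsLR
            = evs[j] :: (evs.drop (j + 1)).takeWhile pvIsLR := by
          rw [hdrop, List.takeWhile_cons, if_pos (show pvIsLR evs[j] = true from hlr)]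
        have hc : (decide ((j : Int) < (evs.length : Int)) && pvIsLRk (pvKeyAt evs (j : Int))) = true := by
          rw [pv_keyAt_nat evs j hlt, hlr]
          simp
          omega
        rw [if_pos hc, show ((j : Int) + 1) = ((j + 1 : Nat) : Int) by push_cast; ring,
            ih (j + 1) (by omega) (by rw [htw] at hf; simp at hf; omega), htw]
        simp
        ring
      · have htw : (evs.drop j).takeWhile pvIsLR = [] := by
          rw [hdrop, List.takeWhile_cons, if_neg (show ¬ pvIsLR evs[j] = true from hlr)]
        have hc : ¬ ((decide ((j : Int) < (evs.length : Int)) && pvIsLRk (pvKeyAt evs (j : Int))) = true) := by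
          rw [pv_keyAt_nat evs j hlt]
          simp [hlr]
        rw [if_neg hc, htw]
        simp
    · have htw : (evs.drop j).takeWhile pvIsLR = [] := by
        have : evs.drop j = [] := by rw [List.drop_eq_nil_iff]; omega
        rw [this, List.takeWhile_nil]
      have hc : ¬ ((decide ((j : Int) < (evs.length : Int)) && pvIsLRk (pvKeyAt evs (j : Int))) = true) := by
        simp
        intro h
        omega
      rw [if_neg hc, htw]
      simp

theorem pv_midLoopA_eq (evs : List (List (String × String))) :
    ∀ (fuel : Nat) (i : Nat) (acc : List (List (String × String))), i ≤ evs.length →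
    evs.length - i < fuel →
    midLoopA evs (evs.length : Int) fuel (i : Int) acc = acc ++ midList (evs.drop i) := by
  intro fuel
  induction fuel with
  | zero => intro i acc _ h; omega
  | succ fuel ih =>
    intro i acc hi hfuel
    unfold midLoopA
    by_cases hlt : i < evs.length
    · rw [if_pos (by exact_mod_cast hlt), pv_keyAt_nat evs i hlt]
      have hdrop := List.drop_eq_getElem_cons hlt
      have htl_le : ((evs.drop i).takeWhile pvIsLR).length ≤ evs.length - i := by
        have h1 : ((evs.drop i).takeWhile pvIsLR).length ≤ (evs.drop i).length :=
          (List.takeWhile_prefix pvIsLR).length_le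
        simp at h1
        omega
      have hrun : midRunA evs (evs.length : Int) fuel (i : Int)
          = (i : Int) + ((evs.drop i).takeWhile pvIsLR).length :=
        pv_midRunA_eq evs fuel i (by omega) (by omega)
      by_cases hlr : pvIsLRk (pvKey evs[i]) = true
      · rw [if_pos hlr, hrun]
        have htw : (evs.drop i).takeWhile pvIsLR
            = evs[i] :: (evs.drop (i + 1)).takeWhile pvIsLR := by
          rw [hdrop, List.takeWhile_cons, if_pos (show pvIsLR evs[i] = true from hlr)]
        by_cases h4 : 4 ≤ ((evs.drop i).takeWhile pvIsLR).length
        · rw [if_pos (by omega : (4 : Int) ≤ (i : Int) + ((evs.drop i).takeWhile pvIsLR).length - i),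
              show ((i : Int) + ((evs.drop i).takeWhile pvIsLR).length)
                = ((i + ((evs.drop i).takeWhile pvIsLR).length : Nat) : Int) by push_cast; ring,
              ih (i + ((evs.drop i).takeWhile pvIsLR).length) acc (by omega) (by omega)]
          have hmid : midList (evs.drop i)
              = midList (evs.drop (i + ((evs.drop i).takeWhile pvIsLR).length)) := by
            conv_lhs => rw [hdrop]
            unfold midList
            rw [if_pos (show pvIsLR evs[i] = true from hlr),
                if_pos (by rw [← hdrop]; exact h4)]
            rw [← hdrop, pv_dropWhile_eq_drop, List.drop_drop]
            conv_rhs => rw [← midList.eq_def]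
          rw [hmid]
        · rw [if_neg (by omega : ¬ (4 : Int) ≤ (i : Int) + ((evs.drop i).takeWhile pvIsLR).length - i),
              pv_evAt_nat evs i hlt,
              show ((i : Int) + 1) = ((i + 1 : Nat) : Int) by push_cast; ring,
              ih (i + 1) (acc ++ [evs[i]]) (by omega) (by omega)]
          have hmid : midList (evs.drop i) = evs[i] :: midList (evs.drop (i + 1)) := by
            conv_lhs => rw [hdrop]
            unfold midList
            rw [if_pos (show pvIsLR evs[i] = true from hlr),
                if_neg (by rw [← hdrop]; exact h4)]
            conv_rhs => rw [← midList.eq_def]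
          rw [hmid]
          simp
      · rw [if_neg hlr, pv_evAt_nat evs i hlt,
            show ((i : Int) + 1) = ((i + 1 : Nat) : Int) by push_cast; ring,
            ih (i + 1) (acc ++ [evs[i]]) (by omega) (by omega)]
        have hmid : midList (evs.drop i) = evs[i] :: midList (evs.drop (i + 1)) := by
          conv_lhs => rw [hdrop]
          unfold midList
          rw [if_neg (show ¬ pvIsLR evs[i] = true from hlr)]
          conv_rhs => rw [← midList.eq_def]
        rw [hmid]
        simp
    · rw [if_neg (by exact_mod_cast hlt)]
      have : evs.drop i = [] := by rw [List.drop_eq_nil_iff]; omega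
      rw [this]
      simp [midList]

theorem pv_midLoop_midList (evs : List (List (String × String))) :
    midLoopA evs (evs.length : Int) (evs.length + 1) 0 [] = midList evs := by
  rw [show (0 : Int) = ((0 : Nat) : Int) from rfl,
      pv_midLoopA_eq evs (evs.length + 1) 0 [] (by omega) (by omega)]
  simp

theorem pv_midList_notLR_split :
    ∀ (l : List (List (String × String))),
    midList l = l.takeWhile (fun x => !pvIsLR x) ++ midList (l.dropWhile (fun x => !pvIsLR x)) := by
  intro l
  induction l with
  | nil => simp [midList]
  | cons a rest ih =>
    by_cases h : pvIsLR a = true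
    · rw [List.takeWhile_cons, List.dropWhile_cons]
      simp [h]
    · rw [List.takeWhile_cons, List.dropWhile_cons]
      simp only [h, Bool.not_false, if_pos]
      show midList (a :: rest) = a :: (_ ++ _)
      unfold midList
      rw [if_neg h, ih]
      conv_rhs => rw [← midList.eq_def]

theorem pv_midList_shortRun_split :
    ∀ (l : List (List (String × String))),
    (l.takeWhile pvIsLR).length < 4 →
    midList l = l.takeWhile pvIsLR ++ midList (l.dropWhile pvIsLR) := by
  intro l
  induction l with
  | nil => simp [midList]
  | cons a rest ih =>
    intro h4
    by_cases h : pvIsLR a = true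
    · rw [List.takeWhile_cons, if_pos h] at h4 ⊢
      rw [List.dropWhile_cons, if_pos h]
      show midList (a :: rest) = a :: (_ ++ _)
      unfold midList
      rw [if_pos h,
          if_neg (by rw [List.takeWhile_cons, if_pos h]; simp at h4 ⊢; omega),
          ih (by simp at h4; omega)]
      conv_rhs => rw [← midList.eq_def]
    · rw [List.takeWhile_cons, if_neg h, List.dropWhile_cons, if_neg h]
      simp

theorem pv_midList_longRun_skip :
    ∀ (l : List (List (String × String))),
    l ≠ [] → pvIsLR (l.headI) = true → 4 ≤ (l.takeWhile pvIsLR).length →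
    midList l = midList (l.dropWhile pvIsLR) := by
  intro l hne hhd h4
  match l with
  | a :: rest =>
    unfold midList
    rw [if_pos (by simpa using hhd), if_pos h4]
    conv_rhs => rw [← midList.eq_def]

-- ---- phase 2 (A): the backward Ctrl+C scan is a find? over pair-start positions ----
def pvP (evs : List (List (String × String))) (n : Int) (j : Int) : Bool :=
  decide (0 ≤ j) && decide (j + 1 < n) && pvIsCtrlk (pvKeyAt evs j) && (pvKeyAt evs (j + 1) == "c")

theorem pv_ctrl_ne_c (k : String) (h : pvIsCtrlk k = true) : (k == "c") = false := by
  unfold pvIsCtrlk at h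
  simp only [Bool.or_eq_true, beq_iff_eq] at h
  rcases h with h | h <;> subst h <;> decide

theorem pv_ctrlLoopA_eq (evs : List (List (String × String))) (n lo : Int)
    (_hn : 0 ≤ n) (hlo : -1 ≤ lo) :
    ∀ (d : Nat) (s : Int), (s - lo).toNat = d → lo ≤ s → s ≤ n - 1 →
    (lo < s → (decide (s + 1 < n) && pvIsCtrlk (pvKeyAt evs s) && (pvKeyAt evs (s + 1) == "c")) = false) →
    ctrlLoopA evs n (PySem.List.pyRange s lo (-1))
      = List.find? (pvP evs n) (PySem.List.pyRange (s - 1) (max lo 0 - 1) (-1)) := by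
  intro d
  induction d with
  | zero =>
    intro s hd hlos hsn _
    rw [pv_pyRangeN_nil (by omega), pv_pyRangeN_nil (by omega)]
    rfl
  | succ d ihd =>
    intro s hd hlos hsn H
    have hlt : lo < s := by omega
    rw [pv_pyRangeN_cons hlt]
    unfold ctrlLoopA
    by_cases hctrl : pvIsCtrlk (pvKeyAt evs s) = true
    · rw [if_pos hctrl]
      have hinner : (decide (s + 1 < n) && (pvKeyAt evs (s + 1) == "c")) = false := by
        have h0 := H hlt
        cases hca : (pvKeyAt evs (s + 1) == "c") <;>
          cases hd1 : decide (s + 1 < n) <;> simp_all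
      rw [if_neg (by simp [hinner])]
      have hne : (pvKeyAt evs s == "c") = false := pv_ctrl_ne_c _ hctrl
      by_cases hms : max lo 0 < s
      · rw [pv_pyRangeN_cons (show max lo 0 - 1 < s - 1 by omega)]
        have hp : pvP evs n (s - 1) = false := by
          unfold pvP
          rw [show (s - 1 + 1) = s by ring, hne]
          simp
        simp only [List.find?_cons, hp]
        exact ihd (s - 1) (by omega) (by omega) (by omega)
          (fun h => by
            cases hc : (pvKeyAt evs (s - 1 + 1) == "c")
            · simp
            · rw [show (s - 1 + 1) = s by ring] at hc
              rw [hc] at hne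
              exact absurd hne (by simp))
      · have hs : s = 0 ∧ lo = -1 := by omega
        rw [hs.1, hs.2, pv_pyRangeN_nil (by omega), pv_pyRangeN_nil (by omega)]
        rfl
    · rw [if_neg hctrl]
      by_cases helif : ((pvKeyAt evs s == "c") && decide (0 < s) && pvIsCtrlk (pvKeyAt evs (s - 1))) = true
      · rw [if_pos helif]
        simp only [Bool.and_eq_true, decide_eq_true_eq] at helif
        obtain ⟨⟨hc, hpos⟩, hcs⟩ := helif
        have hms : max lo 0 - 1 < s - 1 := by omega
        rw [pv_pyRangeN_cons hms]
        have hp : pvP evs n (s - 1) = true := by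
          unfold pvP
          rw [show (s - 1 + 1) = s by ring, hc, hcs]
          simp
          omega
        simp [hp]
      · rw [if_neg helif]
        by_cases hms : max lo 0 < s
        · rw [pv_pyRangeN_cons (show max lo 0 - 1 < s - 1 by omega)]
          have hp : pvP evs n (s - 1) = false := by
            unfold pvP
            rw [show (s - 1 + 1) = s by ring]
            cases hc : (pvKeyAt evs s == "c")
            · simp
            · cases hcs : pvIsCtrlk (pvKeyAt evs (s - 1))
              · simp
              · have : ¬ 0 < s := fun h => helif (by simp [hc, hcs, h])
                simp
                omega
          simp only [List.find?_cons, hp]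
          exact ihd (s - 1) (by omega) (by omega) (by omega)
            (fun h => by
              rw [show (s - 1 + 1) = s by ring]
              cases hc : (pvKeyAt evs s == "c")
              · simp
              · cases hcs : pvIsCtrlk (pvKeyAt evs (s - 1))
                · simp
                · exact absurd (by simp [hc, hcs]; omega : ((pvKeyAt evs s == "c") && decide (0 < s) && pvIsCtrlk (pvKeyAt evs (s - 1))) = true) helif)
        · have hs : s = 0 ∧ lo = -1 := by omega
          rw [hs.1, hs.2, pv_pyRangeN_nil (by omega), pv_pyRangeN_nil (by omega)]
          rfl

theorem pv_ctrl_eq (evs : List (List (String × String))) (n : Int) (hn : 0 ≤ n) :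
    ctrlLoopA evs n (PySem.List.pyRange (n - 1) (max (n - 10) (-1)) (-1))
      = ((PySem.List.pyRange (max 0 (n - 10)) (n - 1) 1).filter
          (fun j => pvIsCtrlk (pvKeyAt evs j) && (pvKeyAt evs (j + 1) == "c"))).getLast? := by
  rw [pv_ctrlLoopA_eq evs n (max (n - 10) (-1)) hn (by omega)
        ((n - 1 - max (n - 10) (-1)).toNat) (n - 1) rfl (by omega) (by omega)
        (fun _ => by simp)]
  rw [pv_getLast?_filter]
  rw [show (max (max (n - 10) (-1)) 0 - 1 : Int) = max 0 (n - 10) - 1 by omega]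
  rw [← pv_rev_pyRange ((n - 1 - max 0 (n - 10)).toNat) (max 0 (n - 10)) (n - 1) rfl]
  refine pv_find?_congr _ _ _ (fun x hx => ?_)
  rw [List.mem_reverse, PySem.List.mem_pyRange_one] at hx
  unfold pvP
  rw [decide_eq_true (show (0 : Int) ≤ x by omega),
      decide_eq_true (show x + 1 < n by omega)]
  simp

-- ---- phase 3 (A): the backward end-pattern scan is a capped takeWhile on the reversed prefix ----
theorem pv_endLoopA_eq (evs : List (List (String × String))) :
    ∀ (c : Nat) (e : Nat) (pat : List String) (idx : Int), c ≤ e → e ≤ evs.length →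
    endLoopA evs (PySem.List.pyRange ((e : Int) - 1) ((e : Int) - 1 - (c : Int)) (-1)) pat idx
      = (((((evs.take e).reverse.takeWhile pvIsLR).take c).reverse.map pvKey) ++ pat,
         if ((((evs.take e).reverse.takeWhile pvIsLR).take c)).length = 0 then idx
         else (e : Int) - ((((evs.take e).reverse.takeWhile pvIsLR).take c)).length) := by
  intro c
  induction c with
  | zero =>
    intro e pat idx _ _
    rw [show ((e : Int) - 1 - ((0 : Nat) : Int)) = (e : Int) - 1 by push_cast; ring,
        pv_pyRangeN_nil (by omega)]
    simp [endLoopA]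
  | succ c ihc =>
    intro e pat idx hce he
    obtain ⟨e', rfl⟩ : ∃ e', e = e' + 1 := ⟨e - 1, by omega⟩
    have helt : e' < evs.length := by omega
    have htk : evs.take (e' + 1) = evs.take e' ++ [evs[e']] := by
      rw [List.take_add_one, List.getElem?_eq_getElem helt]
      rfl
    have hrev : (evs.take (e' + 1)).reverse = evs[e'] :: (evs.take e').reverse := by
      rw [htk]
      simp
    rw [show (((e' + 1 : Nat) : Int) - 1 - ((c + 1 : Nat) : Int)) = (e' : Int) - 1 - (c : Int) by
        push_cast; ring]
    rw [show (((e' + 1 : Nat) : Int) - 1) = (e' : Int) by push_cast; ring]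
    rw [pv_pyRangeN_cons (by omega : (e' : Int) - 1 - (c : Int) < (e' : Int))]
    unfold endLoopA
    rw [pv_keyAt_nat evs e' helt, hrev, List.takeWhile_cons]
    by_cases hlr : pvIsLR evs[e'] = true
    · rw [if_pos (show pvIsLRk (pvKey evs[e']) = true from hlr), if_pos hlr]
      rw [ihc e' (pvKey evs[e'] :: pat) ((e' : Nat) : Int) (by omega) (by omega)]
      rw [List.take_succ_cons, Prod.mk.injEq]
      constructor
      · simp
      · simp only [List.length_cons]
        rw [if_neg (show ¬ ((List.take c (List.takeWhile pvIsLR (List.take e' evs).reverse)).length + 1 = 0) by omega)]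
        by_cases hz : (List.take c (List.takeWhile pvIsLR (List.take e' evs).reverse)).length = 0
        · rw [if_pos hz, hz]
          push_cast
          omega
        · rw [if_neg hz]
          push_cast
          omega
    · rw [if_neg (show ¬ pvIsLRk (pvKey evs[e']) = true from hlr), if_neg hlr]
      simp

-- ---- shared characterization of A's pipeline ----
def specPipe (events : List (List (String × String))) : List (List (String × String)) :=
  if events.length < 10 then events
  else
    let lead := ((events.take 20).takeWhile pvIsLR).length
    let events1 := if 4 ≤ lead then events.drop lead else events
    let n : Int := events1.length
    let cands := (PySem.List.pyRange (max 0 (n - 10)) (n - 1) 1).filter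
      (fun j => pvIsCtrlk (pvKeyAt events1 j) && (pvKeyAt events1 (j + 1) == "c"))
    let events2 :=
      match cands.getLast? with
      | none => events1
      | some cc =>
        let tail : Nat :=
          min 29 (((PySem.List.slice events1 none (some cc)).reverse.takeWhile pvIsLR).length)
        PySem.List.slice events1 none (some (cc - (if 4 ≤ tail then (tail : Int) else 0)))
    midList events2

theorem pv_mem_of_getLast? {α : Type} {l : List α} {a : α} (h : l.getLast? = some a) : a ∈ l := by
  rw [List.getLast?_eq_head?_reverse] at h
  have hm : a ∈ l.reverse := by
    cases hrev : l.reverse with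
    | nil => rw [hrev] at h; simp at h
    | cons x t => rw [hrev] at h; simp at h; simp [h]
  simpa using hm

theorem pv_all_mapKey {r : List (List (String × String))}
    (h : ∀ x ∈ r, pvIsLR x = true) : (r.map pvKey).all pvIsLRk = true := by
  rw [List.all_eq_true]
  intro k hk
  obtain ⟨y, hy, rfl⟩ := List.mem_map.mp hk
  exact h y hy

set_option maxHeartbeats 1000000 in
theorem pv_A_spec (events : List (List (String × String))) :
    remove_sync_artifacts events = specPipe events := by
  by_cases h10 : events.length < 10
  · unfold remove_sync_artifacts specPipe
    rw [if_pos h10, if_pos h10]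
  · simp only [remove_sync_artifacts, specPipe, if_neg h10]
    rw [pv_startPat_eq events]
    have hall1 : ((((events.take 20).takeWhile pvIsLR).map pvKey).all pvIsLRk) = true :=
      pv_all_mapKey (fun x hx => List.mem_takeWhile_imp hx)
    rw [show (if (decide (4 ≤ (((events.take 20).takeWhile pvIsLR).map pvKey).length)
              && (((events.take 20).takeWhile pvIsLR).map pvKey).all pvIsLRk) = true
          then PySem.List.slice events
            (some ((((events.take 20).takeWhile pvIsLR).map pvKey).length : Int)) none
          else events)
        = (if 4 ≤ ((events.take 20).takeWhile pvIsLR).length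
          then events.drop ((events.take 20).takeWhile pvIsLR).length else events) from by
      simp only [hall1, Bool.and_true, List.length_map, decide_eq_true_eq,
        PySem.List.slice_from_natCast]]
    set E1 := (if 4 ≤ ((events.take 20).takeWhile pvIsLR).length
      then events.drop ((events.take 20).takeWhile pvIsLR).length else events) with hE1
    rw [pv_ctrl_eq E1 (E1.length : Int) (by omega)]
    cases hc : ((PySem.List.pyRange (max 0 ((E1.length : Int) - 10)) ((E1.length : Int) - 1) 1).filter
        (fun j => pvIsCtrlk (pvKeyAt E1 j) && (pvKeyAt E1 (j + 1) == "c"))).getLast? with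
    | none =>
      dsimp only
      rw [ite_self]
      exact pv_midLoop_midList E1
    | some cc =>
      have hmem := pv_mem_of_getLast? hc
      rw [List.mem_filter] at hmem
      have hbounds := (PySem.List.mem_pyRange_one).mp hmem.1
      obtain ⟨e, rfl⟩ : ∃ e : Nat, cc = (e : Int) := ⟨cc.toNat, by omega⟩
      have helen : e ≤ E1.length := by omega
      dsimp only
      rw [show (max ((e : Int) - 30) (-1)) = (e : Int) - 1 - ((min 29 e : Nat) : Int) by
        push_cast; omega]
      rw [pv_endLoopA_eq E1 (min 29 e) e [] (e : Int) (by omega) helen]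
      dsimp only
      rw [PySem.List.slice_to _ (by omega : (0 : Int) ≤ (e : Int)), Int.toNat_natCast]
      set tw := (E1.take e).reverse.takeWhile pvIsLR with htw
      have htwlen : tw.length ≤ e := by
        have h1 : tw.length ≤ (E1.take e).reverse.length := (List.takeWhile_prefix pvIsLR).length_le
        simp at h1
        omega
      have hrlen : (tw.take (min 29 e)).length = min 29 tw.length := by
        rw [List.length_take]
        omega
      have hall2 : (((tw.take (min 29 e)).reverse.map pvKey ++ []).all pvIsLRk) = true := by
        rw [List.append_nil]
        exact pv_all_mapKey (fun x hx =>
          List.mem_takeWhile_imp (List.mem_of_mem_take (List.mem_reverse.mp hx)))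
      have hidx : (if (tw.take (min 29 e)).length = 0 then (e : Int)
          else (e : Int) - (tw.take (min 29 e)).length) = (e : Int) - min 29 tw.length := by
        rw [hrlen]
        split_ifs with h0
        · omega
        · omega
      have hcond : (decide (4 ≤ ((tw.take (min 29 e)).reverse.map pvKey ++ []).length)
            && ((tw.take (min 29 e)).reverse.map pvKey ++ []).all pvIsLRk)
          = decide (4 ≤ min 29 tw.length) := by
        rw [hall2, Bool.and_true]
        simp only [List.append_nil, List.length_map, List.length_reverse, hrlen]
      rw [hcond, hidx]
      by_cases h4 : 4 ≤ min 29 tw.length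
      · rw [if_pos (decide_eq_true h4), if_pos h4]
        exact pv_midLoop_midList _
      · rw [if_neg (by simp [h4]), if_neg h4,
            show ((e : Int) - 0) = (e : Int) by ring,
            PySem.List.slice_to _ (by omega : (0 : Int) ≤ (e : Int)), Int.toNat_natCast]
        exact pv_midLoop_midList _

-- ===== B-side lemmas =====

-- spec-level run-length encoding of is_lr over a key list, starting at position i
def specRuns : Int → List String → List (Bool × Int × Int)
  | _, [] => []
  | i, k :: ks =>
    (pvIsLRk k, i, (((k :: ks).takeWhile (fun x => pvIsLRk x == pvIsLRk k)).length : Int)) ::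
      specRuns (i + ((k :: ks).takeWhile (fun x => pvIsLRk x == pvIsLRk k)).length)
        ((k :: ks).drop ((k :: ks).takeWhile (fun x => pvIsLRk x == pvIsLRk k)).length)
termination_by _ l => l.length
decreasing_by
  have : ((k :: ks).takeWhile (fun x => pvIsLRk x == pvIsLRk k)).length ≥ 1 := by
    rw [List.takeWhile_cons, if_pos (by simp)]
    simp
  simp only [List.length_drop, List.length_cons]
  omega

theorem pv_keyAtS_nat (keys : List String) (i : Nat) (h : i < keys.length) :
    keyAtS keys (i : Int) = keys[i] := by
  unfold keyAtS
  rw [PySem.List.pyGet?_natCast, List.getElem?_eq_getElem h]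
  rfl

theorem pv_rleRun_eq (keys : List String) (lr : Bool) :
    ∀ (fuel : Nat) (j : Nat), j ≤ keys.length →
    ((keys.drop j).takeWhile (fun k => pvIsLRk k == lr)).length ≤ fuel →
    rleRun keys (keys.length : Int) lr fuel (j : Int)
      = (j : Int) + ((keys.drop j).takeWhile (fun k => pvIsLRk k == lr)).length := by
  intro fuel
  induction fuel with
  | zero =>
    intro j _ hf
    unfold rleRun
    omega
  | succ fuel ih =>
    intro j hj hf
    unfold rleRun
    by_cases hlt : j < keys.length
    · have hdrop := List.drop_eq_getElem_cons hlt
      by_cases hlr : (pvIsLRk keys[j] == lr) = true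
      · have htw : (keys.drop j).takeWhile (fun k => pvIsLRk k == lr)
            = keys[j] :: (keys.drop (j + 1)).takeWhile (fun k => pvIsLRk k == lr) := by
          rw [hdrop, List.takeWhile_cons, if_pos hlr]
        have hc : (decide ((j : Int) < (keys.length : Int)) && (pvIsLRk (keyAtS keys (j : Int)) == lr)) = true := by
          rw [pv_keyAtS_nat keys j hlt, hlr]
          simp
          omega
        rw [if_pos hc, show ((j : Int) + 1) = ((j + 1 : Nat) : Int) by push_cast; ring,
            ih (j + 1) (by omega) (by rw [htw] at hf; simp at hf; omega), htw]
        simp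
        ring
      · have htw : (keys.drop j).takeWhile (fun k => pvIsLRk k == lr) = [] := by
          rw [hdrop, List.takeWhile_cons, if_neg hlr]
        have hc : ¬ ((decide ((j : Int) < (keys.length : Int)) && (pvIsLRk (keyAtS keys (j : Int)) == lr)) = true) := by
          rw [pv_keyAtS_nat keys j hlt]
          simp only [Bool.and_eq_true, decide_eq_true_eq]
          rintro ⟨-, h2⟩
          exact hlr h2
        rw [if_neg hc, htw]
        simp
    · have htw : (keys.drop j).takeWhile (fun k => pvIsLRk k == lr) = [] := by
        have : keys.drop j = [] := by rw [List.drop_eq_nil_iff]; omega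
        rw [this, List.takeWhile_nil]
      have hc : ¬ ((decide ((j : Int) < (keys.length : Int)) && (pvIsLRk (keyAtS keys (j : Int)) == lr)) = true) := by
        simp
        intro h
        omega
      rw [if_neg hc, htw]
      simp

theorem pv_rleLoop_eq (keys : List String) :
    ∀ (fuel : Nat) (i : Nat) (acc : List (Bool × Int × Int)), i ≤ keys.length →
    keys.length - i < fuel →
    rleLoop keys (keys.length : Int) fuel (i : Int) acc
      = acc ++ specRuns (i : Int) (keys.drop i) := by
  intro fuel
  induction fuel with
  | zero => intro i acc _ h; omega
  | succ fuel ih =>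
    intro i acc hi hfuel
    unfold rleLoop
    by_cases hlt : i < keys.length
    · rw [if_pos (by exact_mod_cast hlt), pv_keyAtS_nat keys i hlt]
      have hdrop := List.drop_eq_getElem_cons hlt
      have hglen : ((keys.drop i).takeWhile (fun x => pvIsLRk x == pvIsLRk keys[i])).length
          ≤ keys.length - i := by
        have h1 : ((keys.drop i).takeWhile (fun x => pvIsLRk x == pvIsLRk keys[i])).length
            ≤ (keys.drop i).length := (List.takeWhile_prefix _).length_le
        simp at h1
        omega
      have hge1 : 1 ≤ ((keys.drop i).takeWhile (fun x => pvIsLRk x == pvIsLRk keys[i])).length := by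
        rw [hdrop, List.takeWhile_cons, if_pos (by simp)]
        simp
      have hrun : rleRun keys (keys.length : Int) (pvIsLRk keys[i]) fuel (i : Int)
          = (i : Int) + ((keys.drop i).takeWhile (fun x => pvIsLRk x == pvIsLRk keys[i])).length :=
        pv_rleRun_eq keys (pvIsLRk keys[i]) fuel i (by omega) (by omega)
      set gl := ((keys.drop i).takeWhile (fun x => pvIsLRk x == pvIsLRk keys[i])).length with hgl
      have hspec : specRuns (i : Int) (keys.drop i)
          = (pvIsLRk keys[i], (i : Int), (gl : Int))
              :: specRuns (((i + gl : Nat)) : Int) (keys.drop (i + gl)) := by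
        conv_lhs => rw [hdrop]
        rw [specRuns]
        rw [← hdrop, ← hgl]
        congr 1
        rw [List.drop_drop]
        congr 1
      rw [hrun, show ((i : Int) + (gl : Int) - (i : Int)) = (gl : Int) by ring,
          show ((i : Int) + (gl : Int)) = (((i + gl : Nat)) : Int) by push_cast; ring,
          ih (i + gl) (acc ++ [(pvIsLRk keys[i], (i : Int), (gl : Int))]) (by omega) (by omega),
          hspec]
      simp
    · rw [if_neg (by exact_mod_cast hlt)]
      have : keys.drop i = [] := by rw [List.drop_eq_nil_iff]; omega
      rw [this]
      simp [specRuns]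

theorem pv_foldl_keepval {α β : Type} (p : α → Bool) (g : α → β) :
    ∀ (l : List α) (acc : β),
    l.foldl (fun acc r => if p r then g r else acc) acc
      = ((l.filter p).getLast?.map g).getD acc := by
  intro l
  induction l with
  | nil => intro acc; simp
  | cons a t ih =>
    intro acc
    by_cases h : p a = true
    · rw [List.foldl_cons, if_pos h, ih, List.filter_cons_of_pos h, List.getLast?_cons]
      cases hfl : (t.filter p).getLast? <;> simp [hfl]
    · rw [List.foldl_cons, if_neg h, ih, List.filter_cons_of_neg (by simp_all)]

theorem pv_takeWhile_append_all {α : Type} (p : α → Bool) (ys : List α) :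
    ∀ (xs : List α), (∀ x ∈ xs, p x = true) → (∀ y, ys.head? = some y → p y = false) →
    (xs ++ ys).takeWhile p = xs := by
  intro xs
  induction xs with
  | nil =>
    intro _ hy
    cases hys : ys with
    | nil => rfl
    | cons y t =>
      rw [List.nil_append, List.takeWhile_cons, if_neg (by simp [hy y (by rw [hys]; rfl)])]
  | cons a t ih =>
    intro hx hy
    rw [List.cons_append, List.takeWhile_cons, if_pos (hx a (by simp)),
        ih (fun x h => hx x (by simp [h])) hy]

theorem pv_dropWhile_append_all {α : Type} (p : α → Bool) (ys : List α) :
    ∀ (xs : List α), (∀ x ∈ xs, p x = true) → (∀ y, ys.head? = some y → p y = false) →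
    (xs ++ ys).dropWhile p = ys := by
  intro xs
  induction xs with
  | nil =>
    intro _ hy
    cases hys : ys with
    | nil => rfl
    | cons y t =>
      rw [List.nil_append, List.dropWhile_cons, if_neg (by simp [hy y (by rw [hys]; rfl)])]
  | cons a t ih =>
    intro hx hy
    rw [List.cons_append, List.dropWhile_cons, if_pos (hx a (by simp)),
        ih (fun x h => hx x (by simp [h])) hy]

theorem pv_keyAt_drop (events : List (List (String × String))) (m : Nat) (j : Int) (hj : 0 ≤ j) :
    pvKeyAt (events.drop m) j = pvKeyAt events ((m : Int) + j) := by
  obtain ⟨k, rfl⟩ : ∃ k : Nat, j = (k : Int) := ⟨j.toNat, by omega⟩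
  unfold pvKeyAt
  rw [PySem.List.pyGet?_natCast,
      show ((m : Int) + (k : Int)) = ((m + k : Nat) : Int) by push_cast; ring,
      PySem.List.pyGet?_natCast, List.getElem?_drop]

theorem pv_head?_take {α : Type} (l : List α) (k : Nat) (hk : 0 < k) :
    (l.take k).head? = l.head? := by
  cases l with
  | nil => simp
  | cons a t =>
    cases k with
    | zero => omega
    | succ k => simp

set_option maxHeartbeats 2000000 in
theorem pv_midfold (events : List (List (String × String))) (lo hi : Nat)
    (hlh : lo ≤ hi) (hh : hi ≤ events.length) :
    ∀ (d : Nat) (m : Nat) (acc : List (List (String × String))), events.length - m ≤ d →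
    (specRuns (m : Int) ((events.map pvKey).drop m)).foldl
      (fun acc r =>
        if r.1 && decide (4 ≤ min (r.2.1 + r.2.2) ((hi : Nat) : Int) - max r.2.1 ((lo : Nat) : Int)) then acc
        else acc ++ PySem.List.slice events (some (max r.2.1 ((lo : Nat) : Int)))
              (some (min (r.2.1 + r.2.2) ((hi : Nat) : Int)))) acc
    = acc ++ midList ((events.take hi).drop (max m lo)) := by
  intro d
  induction d with
  | zero =>
    intro m acc hd
    have h1 : (events.map pvKey).drop m = [] := by
      rw [List.drop_eq_nil_iff]
      simp
      omega
    have h2 : (events.take hi).drop (max m lo) = [] := by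
      rw [List.drop_eq_nil_iff]
      simp
      omega
    rw [h1, h2]
    simp [specRuns, midList]
  | succ d ih =>
    intro m acc hd
    by_cases hm : events.length ≤ m
    · have h1 : (events.map pvKey).drop m = [] := by
        rw [List.drop_eq_nil_iff]
        simp
        omega
      have h2 : (events.take hi).drop (max m lo) = [] := by
        rw [List.drop_eq_nil_iff]
        simp
        omega
      rw [h1, h2]
      simp [specRuns, midList]
    · push_neg at hm
      have hdropE : events.drop m = events[m] :: events.drop (m + 1) := List.drop_eq_getElem_cons hm
      have hmap : (events.map pvKey).drop m = (events.drop m).map pvKey := (List.map_drop).symm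
      have hkeys : (events.map pvKey).drop m
          = pvKey events[m] :: (events.drop (m + 1)).map pvKey := by
        rw [hmap, hdropE, List.map_cons]
      -- the key-side group length and its event-side twin
      set glK := (((events.map pvKey).drop m).takeWhile
        (fun x => pvIsLRk x == pvIsLRk (pvKey events[m]))).length with hglK
      have hcomp : ((fun x => pvIsLRk x == pvIsLRk (pvKey events[m])) ∘ pvKey)
          = (fun e => pvIsLR e == pvIsLR events[m]) := by
        funext e
        rfl
      have hGlen : glK = ((events.drop m).takeWhile (fun e => pvIsLR e == pvIsLR events[m])).length := by
        rw [hglK, hmap, List.takeWhile_map, List.length_map, hcomp]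
      have hge1 : 1 ≤ glK := by
        rw [hglK, hkeys, List.takeWhile_cons, if_pos (by simp)]
        simp
      have hbnd : glK ≤ events.length - m := by
        have h1 : glK ≤ ((events.map pvKey).drop m).length := by
          rw [hglK]
          exact (List.takeWhile_prefix _).length_le
        simp at h1
        omega
      have hGtake : (events.drop m).take glK
          = (events.drop m).takeWhile (fun e => pvIsLR e == pvIsLR events[m]) := by
        rw [hGlen]
        exact pv_take_takeWhile_len _ _
      have hGall : ∀ e ∈ (events.drop m).take glK, pvIsLR e = pvIsLR events[m] := by
        intro e he
        rw [hGtake] at he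
        have := List.mem_takeWhile_imp he
        simpa using this
      have hnext : ∀ _ : m + glK < events.length,
          ¬ pvIsLR events[m + glK] = pvIsLR events[m] := by
        intro hlt2
        have hdw : (events.drop m).dropWhile (fun e => pvIsLR e == pvIsLR events[m])
            = events.drop (m + glK) := by
          rw [pv_dropWhile_eq_drop, ← hGlen, List.drop_drop]
        have hhd : ((events.drop m).dropWhile (fun e => pvIsLR e == pvIsLR events[m])).head?
            = some events[m + glK] := by
          rw [hdw, List.head?_drop, List.getElem?_eq_getElem (by omega)]
        have := List.head?_dropWhile_not (fun e => pvIsLR e == pvIsLR events[m]) (events.drop m)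
        rw [hhd] at this
        simp at this
        exact this
      -- unfold the head run of specRuns
      have hruns : specRuns (m : Int) ((events.map pvKey).drop m)
          = (pvIsLR events[m], (m : Int), (glK : Int))
              :: specRuns (((m + glK : Nat)) : Int) ((events.map pvKey).drop (m + glK)) := by
        conv_lhs => rw [hkeys]
        rw [specRuns]
        rw [← hkeys, ← hglK]
        have hfst : pvIsLRk (pvKey events[m]) = pvIsLR events[m] := rfl
        rw [hfst]
        congr 1
        rw [List.drop_drop]
        congr 1
      rw [hruns, List.foldl_cons]
      -- Nat forms of the clip bounds
      have hmaxc : max ((m : Nat) : Int) ((lo : Nat) : Int) = ((max m lo : Nat) : Int) := by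
        push_cast
        ring
      have hminc : min (((m : Nat) : Int) + ((glK : Nat) : Int)) ((hi : Nat) : Int)
          = ((min (m + glK) hi : Nat) : Int) := by
        push_cast
        ring
      have hslice : PySem.List.slice events (some ((max m lo : Nat) : Int))
            (some ((min (m + glK) hi : Nat) : Int))
          = (events.drop (max m lo)).take (min (m + glK) hi - max m lo) :=
        PySem.List.slice_natCast events (max m lo) (min (m + glK) hi)
      have hS : (events.take hi).drop (max m lo)
          = (events.drop (max m lo)).take (hi - max m lo) := List.drop_take
      have hS' : (events.take hi).drop (max (m + glK) lo)
          = (events.drop (max (m + glK) lo)).take (hi - max (m + glK) lo) := List.drop_take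
      by_cases hab : min (m + glK) hi ≤ max m lo
      · -- empty clip: the step is a no-op and the slice window is unchanged (or empty)
        have hcond : (pvIsLR events[m] &&
            decide (4 ≤ min (((m : Nat) : Int) + ((glK : Nat) : Int)) ((hi : Nat) : Int)
              - max ((m : Nat) : Int) ((lo : Nat) : Int))) = false := by
          cases hx : pvIsLR events[m] <;> simp <;> omega
        rw [hcond, if_neg Bool.false_ne_true, hmaxc, hminc, hslice,
          show min (m + glK) hi - max m lo = 0 by omega, List.take_zero, List.append_nil]
        rw [ih (m + glK) acc (by omega)]
        congr 2
        by_cases hc1 : hi ≤ max m lo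
        · have e1 : (events.take hi).drop (max m lo) = [] := by
            rw [List.drop_eq_nil_iff]
            simp
            omega
          have e2 : (events.take hi).drop (max (m + glK) lo) = [] := by
            rw [List.drop_eq_nil_iff]
            simp
            omega
          rw [e1, e2]
        · have hml : m + glK ≤ lo := by omega
          rw [show max (m + glK) lo = lo by omega, show max m lo = lo by omega]
      · push_neg at hab
        -- nonempty clip [aN, bN)
        set aN := max m lo with haN
        set bN := min (m + glK) hi with hbN
        have hab' : aN < bN := hab
        have haNm : m ≤ aN := le_max_left _ _
        have haNlo : lo ≤ aN := le_max_right _ _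
        have hbNhi : bN ≤ hi := min_le_right _ _
        have hbNg : bN ≤ m + glK := min_le_left _ _
        have hbNlen : bN ≤ events.length := by omega
        -- P, S₂ decomposition of the current window
        have hsplit : (events.drop aN).take (hi - aN)
            = (events.drop aN).take (bN - aN) ++ (events.drop bN).take (hi - bN) := by
          rw [show hi - aN = (bN - aN) + (hi - bN) by omega, List.take_add]
          congr 1
          rw [List.drop_drop, show aN + (bN - aN) = bN by omega]
        have hPsub : (events.drop aN).take (bN - aN)
            = (((events.drop m).take glK).drop (aN - m)).take (bN - aN) := by
          rw [List.drop_take, List.drop_drop, show m + (aN - m) = aN by omega, List.take_take,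
              show min (bN - aN) (glK - (aN - m)) = bN - aN by omega]
        have hPall : ∀ e ∈ (events.drop aN).take (bN - aN), pvIsLR e = pvIsLR events[m] := by
          intro e he
          rw [hPsub] at he
          exact hGall e (List.mem_of_mem_drop (List.mem_of_mem_take he))
        have hPne : (events.drop aN).take (bN - aN) ≠ [] := by
          intro hc
          have := congrArg List.length hc
          rw [List.length_take] at this
          simp at this
          omega
        have hPlen : ((events.drop aN).take (bN - aN)).length = bN - aN := by
          rw [List.length_take]
          have : (events.drop aN).length = events.length - aN := by simp
          omega
        have hS2head : ∀ y, ((events.drop bN).take (hi - bN)).head? = some y →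
            ¬ pvIsLR y = pvIsLR events[m] := by
          intro y hy
          have hbh : bN < hi := by
            by_contra hc
            rw [show hi - bN = 0 by omega] at hy
            simp at hy
          have hbg : bN = m + glK := by omega
          rw [pv_head?_take _ _ (by omega), List.head?_drop, hbg,
              List.getElem?_eq_getElem (by omega : m + glK < events.length)] at hy
          cases hy
          exact hnext (by omega)
        rw [hS, hsplit]
        -- the recursive window
        have hrec : midList ((events.take hi).drop (max (m + glK) lo))
            = midList ((events.drop bN).take (hi - bN)) := by
          rw [show max (m + glK) lo = m + glK by omega]
          by_cases hbg : bN = m + glK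
          · rw [← hbg, List.drop_take]
          · have hbh : bN = hi := by omega
            have e1 : (events.take hi).drop (m + glK) = [] := by
              rw [List.drop_eq_nil_iff]
              simp
              omega
            rw [e1, show hi - bN = 0 by omega, List.take_zero]
        by_cases hf : pvIsLR events[m] = true
        · have htw : ((events.drop aN).take (bN - aN) ++ (events.drop bN).take (hi - bN)).takeWhile pvIsLR
              = (events.drop aN).take (bN - aN) :=
            pv_takeWhile_append_all pvIsLR _ _ (fun x hx => (hPall x hx).trans hf)
              (fun y hy => by have := hS2head y hy; rw [hf] at this; simpa using this)
          have hdw : ((events.drop aN).take (bN - aN) ++ (events.drop bN).take (hi - bN)).dropWhile pvIsLR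
              = (events.drop bN).take (hi - bN) :=
            pv_dropWhile_append_all pvIsLR _ _ (fun x hx => (hPall x hx).trans hf)
              (fun y hy => by have := hS2head y hy; rw [hf] at this; simpa using this)
          by_cases h4 : 4 ≤ bN - aN
          · -- long l/r run: dropped by both sides
            have hcond : (pvIsLR events[m] &&
                decide (4 ≤ min (((m : Nat) : Int) + ((glK : Nat) : Int)) ((hi : Nat) : Int)
                  - max ((m : Nat) : Int) ((lo : Nat) : Int))) = true := by
              rw [hf]
              simp
              omega
            have hne2 : (events.drop aN).take (bN - aN) ++ (events.drop bN).take (hi - bN) ≠ [] := by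
              intro hc
              exact hPne (by simpa using (List.append_eq_nil_iff.mp hc).1)
            have hhd2 : pvIsLR (((events.drop aN).take (bN - aN) ++ (events.drop bN).take (hi - bN)).headI) = true := by
              cases hP : (events.drop aN).take (bN - aN) with
              | nil => exact absurd hP hPne
              | cons x xs =>
                show pvIsLR x = true
                exact (hPall x (by rw [hP]; simp)).trans hf
            have hmid : midList ((events.drop aN).take (bN - aN) ++ (events.drop bN).take (hi - bN))
                = midList ((events.drop bN).take (hi - bN)) := by
              rw [pv_midList_longRun_skip _ hne2 hhd2 (by rw [htw]; omega), hdw]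
            rw [hcond, if_pos rfl, ih (m + glK) acc (by omega), hrec, hmid]
          · -- short l/r run: kept by both sides
            have hcond : (pvIsLR events[m] &&
                decide (4 ≤ min (((m : Nat) : Int) + ((glK : Nat) : Int)) ((hi : Nat) : Int)
                  - max ((m : Nat) : Int) ((lo : Nat) : Int))) = false := by
              rw [hf]
              simp
              omega
            have hmid : midList ((events.drop aN).take (bN - aN) ++ (events.drop bN).take (hi - bN))
                = (events.drop aN).take (bN - aN) ++ midList ((events.drop bN).take (hi - bN)) := by
              rw [pv_midList_shortRun_split _ (by rw [htw]; omega), htw, hdw]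
            rw [hcond, if_neg Bool.false_ne_true, hmaxc, hminc, hslice,
                ih (m + glK) _ (by omega), hrec, hmid]
            simp
        · -- non-l/r run: always kept
          have hf' : pvIsLR events[m] = false := by
            cases hx : pvIsLR events[m]
            · rfl
            · exact absurd hx hf
          have hcond : (pvIsLR events[m] &&
              decide (4 ≤ min (((m : Nat) : Int) + ((glK : Nat) : Int)) ((hi : Nat) : Int)
                - max ((m : Nat) : Int) ((lo : Nat) : Int))) = false := by
            rw [hf']
            simp
          have htw : ((events.drop aN).take (bN - aN) ++ (events.drop bN).take (hi - bN)).takeWhile (fun x => !pvIsLR x)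
              = (events.drop aN).take (bN - aN) :=
            pv_takeWhile_append_all _ _ _
              (fun x hx => by rw [(hPall x hx).trans hf']; rfl)
              (fun y hy => by
                have := hS2head y hy
                rw [hf'] at this
                cases hyy : pvIsLR y
                · exact absurd hyy this
                · rfl)
          have hdw : ((events.drop aN).take (bN - aN) ++ (events.drop bN).take (hi - bN)).dropWhile (fun x => !pvIsLR x)
              = (events.drop bN).take (hi - bN) :=
            pv_dropWhile_append_all _ _ _
              (fun x hx => by rw [(hPall x hx).trans hf']; rfl)
              (fun y hy => by
                have := hS2head y hy
                rw [hf'] at this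
                cases hyy : pvIsLR y
                · exact absurd hyy this
                · rfl)
          have hmid : midList ((events.drop aN).take (bN - aN) ++ (events.drop bN).take (hi - bN))
              = (events.drop aN).take (bN - aN) ++ midList ((events.drop bN).take (hi - bN)) := by
            rw [pv_midList_notLR_split ((events.drop aN).take (bN - aN) ++ (events.drop bN).take (hi - bN)), htw, hdw]
          rw [hcond, if_neg Bool.false_ne_true, hmaxc, hminc, hslice,
              ih (m + glK) _ (by omega), hrec, hmid]
          simp

theorem pv_tw_len_eq {α : Type} (p : α → Bool) :
    ∀ (l : List α) (k : Nat) (hk : k ≤ l.length),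
    (∀ i (hi : i < k), p (l[i]'(by omega)) = true) →
    (∀ hlt : k < l.length, p (l[k]'hlt) = false) →
    (l.takeWhile p).length = k := by
  intro l
  induction l with
  | nil =>
    intro k hk _ _
    simp at hk
    simp [hk]
  | cons a tl ih =>
    intro k hk h1 h2
    cases k with
    | zero =>
      have := h2 (by simp)
      simp at this
      rw [List.takeWhile_cons, if_neg (by simp [this])]
      rfl
    | succ k =>
      have ha : p a = true := h1 0 (by omega)
      rw [List.takeWhile_cons, if_pos ha]
      simp only [List.length_cons]
      rw [ih k (by simpa using hk) (fun i hi => by simpa using h1 (i + 1) (by omega))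
            (fun h => by simpa using h2 (by simpa using h))]

theorem pv_specRuns_cons (keys : List String) (m : Nat) (hm : m < keys.length) :
    specRuns (m : Int) (keys.drop m)
      = (pvIsLRk keys[m], (m : Int),
          ((((keys.drop m).takeWhile (fun x => pvIsLRk x == pvIsLRk keys[m])).length : Nat) : Int))
        :: specRuns (((m + ((keys.drop m).takeWhile (fun x => pvIsLRk x == pvIsLRk keys[m])).length : Nat)) : Int)
             (keys.drop (m + ((keys.drop m).takeWhile (fun x => pvIsLRk x == pvIsLRk keys[m])).length)) := by
  have hdrop := List.drop_eq_getElem_cons hm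
  conv_lhs => rw [hdrop]
  rw [specRuns, ← hdrop]
  congr 1
  rw [List.drop_drop]
  congr 1

theorem pv_gl_ge1 (keys : List String) (m : Nat) (hm : m < keys.length) :
    1 ≤ ((keys.drop m).takeWhile (fun x => pvIsLRk x == pvIsLRk keys[m])).length := by
  rw [List.drop_eq_getElem_cons hm, List.takeWhile_cons, if_pos (by simp)]
  simp

theorem pv_gl_le (keys : List String) (m : Nat) (b : Bool) :
    ((keys.drop m).takeWhile (fun x => pvIsLRk x == b)).length ≤ keys.length - m := by
  have h1 : ((keys.drop m).takeWhile (fun x => pvIsLRk x == b)).length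
      ≤ (keys.drop m).length := (List.takeWhile_prefix _).length_le
  simp at h1
  omega

theorem pv_takeWhile_getElem? {α : Type} (p : α → Bool) :
    ∀ (l : List α) (i : Nat), i < (l.takeWhile p).length →
    ∃ x, l[i]? = some x ∧ p x = true := by
  intro l
  induction l with
  | nil => simp
  | cons a tl ih =>
    intro i hi
    rw [List.takeWhile_cons] at hi
    by_cases hp : p a = true
    · rw [if_pos hp] at hi
      cases i with
      | zero => exact ⟨a, rfl, hp⟩
      | succ i =>
        simp only [List.length_cons, Nat.succ_lt_succ_iff] at hi
        obtain ⟨x, hx, hpx⟩ := ih i hi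
        exact ⟨x, by simpa using hx, hpx⟩
    · rw [if_neg hp] at hi
      simp at hi
  
theorem pv_gl_content (keys : List String) (m : Nat) (hm : m < keys.length) :
    ∀ j, m ≤ j → j < m + ((keys.drop m).takeWhile (fun x => pvIsLRk x == pvIsLRk keys[m])).length →
    keys[j]?.map pvIsLRk = some (pvIsLRk keys[m]) := by
  intro j h1 h2
  obtain ⟨x, hx, hpx⟩ := pv_takeWhile_getElem? (fun x => pvIsLRk x == pvIsLRk keys[m])
    (keys.drop m) (j - m) (by omega)
  rw [List.getElem?_drop, show m + (j - m) = j by omega] at hx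
  rw [hx]
  simp at hpx ⊢
  exact hpx

theorem pv_gl_after (keys : List String) (m : Nat) (hm : m < keys.length) :
    ∀ x, keys[m + ((keys.drop m).takeWhile (fun x => pvIsLRk x == pvIsLRk keys[m])).length]? = some x →
    ¬ pvIsLRk x = pvIsLRk keys[m] := by
  intro x hx
  have hdw : (keys.drop m).dropWhile (fun x => pvIsLRk x == pvIsLRk keys[m])
      = keys.drop (m + ((keys.drop m).takeWhile (fun x => pvIsLRk x == pvIsLRk keys[m])).length) := by
    rw [pv_dropWhile_eq_drop, List.drop_drop]
  have hhd : ((keys.drop m).dropWhile (fun x => pvIsLRk x == pvIsLRk keys[m])).head? = some x := by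
    rw [hdw, List.head?_drop]
    exact hx
  have := List.head?_dropWhile_not (fun x => pvIsLRk x == pvIsLRk keys[m]) (keys.drop m)
  rw [hhd] at this
  simpa using this

theorem pv_specRuns_bounds (keys : List String) :
    ∀ (d m : Nat), keys.length - m ≤ d →
    ∀ r ∈ specRuns (m : Int) (keys.drop m),
      (m : Int) ≤ r.2.1 ∧ 1 ≤ r.2.2 ∧ r.2.1 + r.2.2 ≤ (keys.length : Int) := by
  intro d
  induction d with
  | zero =>
    intro m hd r hr
    rw [show keys.drop m = [] by rw [List.drop_eq_nil_iff]; omega] at hr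
    simp [specRuns] at hr
  | succ d ih =>
    intro m hd r hr
    by_cases hm : keys.length ≤ m
    · rw [show keys.drop m = [] by rw [List.drop_eq_nil_iff]; omega] at hr
      simp [specRuns] at hr
    · push_neg at hm
      rw [pv_specRuns_cons keys m hm] at hr
      have hge1 := pv_gl_ge1 keys m hm
      have hle := pv_gl_le keys m (pvIsLRk keys[m])
      rcases List.mem_cons.mp hr with rfl | hr'
      · refine ⟨le_refl _, ?_, ?_⟩ <;> simp <;> omega
      · have := ih (m + ((keys.drop m).takeWhile (fun x => pvIsLRk x == pvIsLRk keys[m])).length)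
          (by omega) r hr'
        push_cast at this ⊢
        omega

set_option maxHeartbeats 1000000 in
theorem pv_filt (keys : List String) (t : Nat) (ht : t < keys.length) :
    ∀ (d m : Nat), keys.length - m ≤ d → m ≤ t →
    (m = 0 ∨ pvIsLRk (keys.getD (m - 1) "") ≠ pvIsLRk (keys.getD m "")) →
    (specRuns (m : Int) (keys.drop m)).filter
      (fun r => r.1 && decide (r.2.1 ≤ (t : Int)) && decide ((t : Int) < r.2.1 + r.2.2))
    = if pvIsLRk (keys.getD t "") then
        [(true, ((t - ((keys.take t).reverse.takeWhile pvIsLRk).length : Nat) : Int),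
          ((((keys.take t).reverse.takeWhile pvIsLRk).length
            + ((keys.drop t).takeWhile pvIsLRk).length : Nat) : Int))]
      else [] := by
  intro d
  induction d with
  | zero => intro m hd hmt _; omega
  | succ d ih =>
    intro m hd hmt hbd
    have hm : m < keys.length := by omega
    rw [pv_specRuns_cons keys m hm, List.filter_cons]
    set gl := ((keys.drop m).takeWhile (fun x => pvIsLRk x == pvIsLRk keys[m])).length with hgl
    have hge1 : 1 ≤ gl := pv_gl_ge1 keys m hm
    have hle : gl ≤ keys.length - m := pv_gl_le keys m (pvIsLRk keys[m])
    have hcontent : ∀ j, m ≤ j → j < m + gl → ∀ (hj : j < keys.length),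
        pvIsLRk (keys[j]'hj) = pvIsLRk keys[m] := by
      intro j h1 h2 hj
      have := pv_gl_content keys m hm j h1 h2
      rw [List.getElem?_eq_getElem hj] at this
      simpa using this
    by_cases hin : t < m + gl
    · -- t lies in the head run
      have hflag : pvIsLRk keys[t] = pvIsLRk keys[m] := hcontent t hmt hin ht
      have hrest : (specRuns (((m + gl : Nat)) : Int) (keys.drop (m + gl))).filter
          (fun r => r.1 && decide (r.2.1 ≤ (t : Int)) && decide ((t : Int) < r.2.1 + r.2.2)) = [] := by
        rw [List.filter_eq_nil_iff]
        intro r hr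
        have := pv_specRuns_bounds keys (keys.length - (m + gl)) (m + gl) (le_refl _) r hr
        simp only [Bool.and_eq_true, decide_eq_true_eq]
        rintro ⟨⟨-, h1⟩, -⟩
        have h2 : ((m + gl : Nat) : Int) ≤ (t : Int) := le_trans this.1 h1
        push_cast at h2
        omega
      by_cases hf : pvIsLRk keys[m] = true
      · have hbc : ((keys.take t).reverse.takeWhile pvIsLRk).length = t - m := by
          refine pv_tw_len_eq pvIsLRk _ _ (by simp; omega) ?_ ?_
          · intro i hi
            have hidx : (keys.take t).reverse[i]'(by simp; omega)
                = keys[t - 1 - i]'(by omega) := by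
              rw [List.getElem_reverse, List.getElem_take]
              congr 1
              simp
              all_goals omega
            rw [hidx, hcontent (t - 1 - i) (by omega) (by omega) (by omega), hf]
          · intro hlt
            have hm1 : 1 ≤ m := by
              have hlen : (keys.take t).reverse.length = t := by
                simp
                omega
              rw [hlen] at hlt
              omega
            have hidx : (keys.take t).reverse[t - m]'hlt = keys[m - 1]'(by omega) := by
              rw [List.getElem_reverse, List.getElem_take]
              congr 1
              simp
              all_goals omega
            rw [hidx]
            rcases hbd with h0 | hne
            · omega
            · rw [List.getD_eq_getElem keys "" (by omega : m - 1 < keys.length),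
                  List.getD_eq_getElem keys "" hm] at hne
              cases hx : pvIsLRk (keys[m - 1]'(by omega))
              · rfl
              · rw [hx, hf] at hne
                exact absurd rfl hne
        have hfc : ((keys.drop t).takeWhile pvIsLRk).length = m + gl - t := by
          refine pv_tw_len_eq pvIsLRk _ _ (by simp; omega) ?_ ?_
          · intro i hi
            have hidx : (keys.drop t)[i]'(by simp; omega) = keys[t + i]'(by omega) :=
              List.getElem_drop
            rw [hidx, hcontent (t + i) (by omega) (by omega) (by omega), hf]
          · intro hlt
            simp only [List.length_drop] at hlt
            have hglt : m + gl < keys.length := by omega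
            have hidx : (keys.drop t)[m + gl - t]'(by simp; omega)
                = keys[m + gl]'hglt := by
              rw [List.getElem_drop]
              congr 1
              omega
            rw [hidx]
            have := pv_gl_after keys m hm (keys[m + gl]'hglt)
              (by rw [List.getElem?_eq_getElem hglt])
            cases hx : pvIsLRk (keys[m + gl]'hglt)
            · rfl
            · rw [← hf] at hx
              exact absurd hx this
        have hkeep : ((pvIsLRk keys[m] && decide (((m : Nat) : Int) ≤ (t : Int))
            && decide ((t : Int) < ((m : Nat) : Int) + ((gl : Nat) : Int)))) = true := by
          rw [hf]
          simp
          omega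
        rw [if_pos hkeep, hrest,
            if_pos (by rw [List.getD_eq_getElem keys "" ht, hflag]; exact hf)]
        rw [hbc, hfc]
        simp only [show t - (t - m) = m from by omega,
          show (t - m) + (m + gl - t) = gl from by omega]
        rw [hf]
      · have hf' : pvIsLRk keys[m] = false := by
          cases hx : pvIsLRk keys[m]
          · rfl
          · exact absurd hx hf
        have hskip2 : ((pvIsLRk keys[m] && decide (((m : Nat) : Int) ≤ (t : Int))
            && decide ((t : Int) < ((m : Nat) : Int) + ((gl : Nat) : Int)))) = false := by
          rw [hf']
          simp
        rw [if_neg (by rw [hskip2]; exact Bool.false_ne_true), hrest,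
            if_neg (by rw [List.getD_eq_getElem keys "" ht, hflag, hf']; simp)]
    · -- t is beyond the head run: skip it and recurse
      have hskip : ((pvIsLRk keys[m] && decide (((m : Nat) : Int) ≤ (t : Int))
          && decide ((t : Int) < ((m : Nat) : Int) + ((gl : Nat) : Int)))) = false := by
        have : ¬ ((t : Int) < ((m : Nat) : Int) + ((gl : Nat) : Int)) := by
          push_cast
          omega
        simp [this]
      rw [if_neg (by rw [hskip]; exact Bool.false_ne_true)]
      have hnewbd : (m + gl = 0 ∨ pvIsLRk (keys.getD (m + gl - 1) "")
          ≠ pvIsLRk (keys.getD (m + gl) "")) := by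
        right
        have hlt2 : m + gl < keys.length := by omega
        have hprev : pvIsLRk (keys.getD (m + gl - 1) "") = pvIsLRk keys[m] := by
          rw [List.getD_eq_getElem keys "" (by omega : m + gl - 1 < keys.length)]
          exact hcontent (m + gl - 1) (by omega) (by omega) (by omega)
        have hcur : ¬ pvIsLRk (keys.getD (m + gl) "") = pvIsLRk keys[m] := by
          rw [List.getD_eq_getElem keys "" hlt2]
          exact pv_gl_after keys m hm _ (by rw [List.getElem?_eq_getElem hlt2])
        rw [hprev]
        intro hc
        exact hcur hc.symm
      exact ih (m + gl) (by omega) (by omega) hnewbd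

theorem pv_revtw_window {α : Type} (p : α → Bool) (l : List α) (u v : Nat)
    (huv : u ≤ v) (hv : v ≤ l.length) :
    ((((l.drop u).take (v - u)).reverse).takeWhile p).length
      = min (((l.take v).reverse.takeWhile p).length) (v - u) := by
  have hsplit : l.take v = l.take u ++ (l.drop u).take (v - u) := by
    conv_lhs => rw [show v = u + (v - u) by omega]
    rw [List.take_add]
  rw [hsplit, List.reverse_append, pv_takeWhile_append_len]
  have hmlen : (((l.drop u).take (v - u)).reverse).length = v - u := by
    simp
    omega
  rw [hmlen]
  have hle : ((((l.drop u).take (v - u)).reverse).takeWhile p).length ≤ v - u := by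
    have h1 : ((((l.drop u).take (v - u)).reverse).takeWhile p).length
        ≤ (((l.drop u).take (v - u)).reverse).length := (List.takeWhile_prefix _).length_le
    omega
  by_cases hc : ((((l.drop u).take (v - u)).reverse).takeWhile p).length < v - u
  · rw [if_pos hc]
    omega
  · rw [if_neg hc]
    omega

theorem pv_twLR_map (l : List (List (String × String))) :
    ((l.map pvKey).takeWhile pvIsLRk).length = (l.takeWhile pvIsLR).length := by
  rw [List.takeWhile_map, List.length_map]
  rfl

theorem pv_lo_eq (events : List (List (String × String))) (h0 : 0 < events.length) :
    (if ((PySem.List.pyGet? (specRuns 0 (events.map pvKey)) 0).getD (false, 0, 0)).1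
        && decide (4 ≤ min 20 ((PySem.List.pyGet? (specRuns 0 (events.map pvKey)) 0).getD (false, 0, 0)).2.2)
     then min 20 ((PySem.List.pyGet? (specRuns 0 (events.map pvKey)) 0).getD (false, 0, 0)).2.2 else 0)
    = (((if 4 ≤ ((events.take 20).takeWhile pvIsLR).length
        then ((events.take 20).takeWhile pvIsLR).length else 0) : Nat) : Int) := by
  obtain ⟨e, rest, rfl⟩ : ∃ e rest, events = e :: rest := by
    cases events with
    | nil => simp at h0
    | cons e rest => exact ⟨e, rest, rfl⟩
  have h0K : 0 < ((e :: rest).map pvKey).length := by simp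
  have hcons := pv_specRuns_cons ((e :: rest).map pvKey) 0 h0K
  simp only [List.drop_zero, Nat.cast_zero, Nat.zero_add] at hcons
  rw [hcons, PySem.List.pyGet?_zero_cons, Option.getD_some]
  set L := (((e :: rest).map pvKey).takeWhile
    (fun x => pvIsLRk x == pvIsLRk (((e :: rest).map pvKey)[0]'h0K))).length with hL
  dsimp only
  by_cases hf : pvIsLRk (pvKey e) = true
  · have hfK : pvIsLRk (((e :: rest).map pvKey)[0]'h0K) = true := hf
    have hpred : (fun x => pvIsLRk x == pvIsLRk (((e :: rest).map pvKey)[0]'h0K)) = pvIsLRk := by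
      funext x
      rw [hfK]
      cases pvIsLRk x <;> rfl
    have hlead : (((e :: rest).take 20).takeWhile pvIsLR).length = min 20 L := by
      rw [hL, hpred, ← pv_twLR_map ((e :: rest).take 20), List.map_take, pv_takeWhile_take_len]
    rw [hfK, Bool.true_and]
    by_cases h4 : (4 : Int) ≤ min 20 (L : Int)
    · rw [if_pos (decide_eq_true h4), if_pos (by rw [hlead]; push_cast at h4 ⊢; omega)]
      rw [hlead]
      push_cast
      omega
    · rw [if_neg (by simpa using h4), if_neg (by rw [hlead]; push_cast at h4 ⊢; omega)]
      simp
  · have hfK : pvIsLRk (((e :: rest).map pvKey)[0]'h0K) = false := by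
      cases hx : pvIsLRk (pvKey e)
      · exact hx
      · exact absurd hx hf
    have hlead0 : (((e :: rest).take 20).takeWhile pvIsLR).length = 0 := by
      rw [show (20 : Nat) = 19 + 1 from rfl, List.take_succ_cons, List.takeWhile_cons,
          if_neg (by show ¬ pvIsLRk (pvKey e) = true; exact hf)]
      rfl
    rw [hfK, Bool.false_and, if_neg Bool.false_ne_true, hlead0]
    simp

theorem pv_cc_eq (events : List (List (String × String))) (loN : Nat)
    (hlo : loN ≤ events.length) :
    ((PySem.List.pyRange (max ((loN : Nat) : Int) ((events.length : Int) - 10))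
        ((events.length : Int) - 1) 1).foldl
      (fun acc j =>
        if pvIsCtrlk (keyAtS (events.map pvKey) j) && (keyAtS (events.map pvKey) (j + 1) == "c")
        then some j else acc) none)
    = (((PySem.List.pyRange (max 0 (((events.drop loN).length : Int) - 10))
          (((events.drop loN).length : Int) - 1) 1).filter
        (fun j => pvIsCtrlk (pvKeyAt (events.drop loN) j)
          && (pvKeyAt (events.drop loN) (j + 1) == "c"))).getLast?).map
        (fun c => (loN : Int) + c) := by
  have hshift := pv_pyRange_one_shift ((loN : Nat) : Int)
    ((((events.drop loN).length : Int) - 1 - max 0 (((events.drop loN).length : Int) - 10)).toNat)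
    (max 0 (((events.drop loN).length : Int) - 10)) (((events.drop loN).length : Int) - 1) rfl
  rw [show max ((loN : Nat) : Int) ((events.length : Int) - 10)
        = ((loN : Nat) : Int) + max 0 (((events.drop loN).length : Int) - 10) by simp; omega,
      show ((events.length : Int) - 1)
        = ((loN : Nat) : Int) + (((events.drop loN).length : Int) - 1) by simp; omega,
      hshift, List.foldl_map,
      pv_foldl_keepval
        (fun j => pvIsCtrlk (keyAtS (events.map pvKey) (((loN : Nat) : Int) + j))
          && (keyAtS (events.map pvKey) (((loN : Nat) : Int) + j + 1) == "c"))
        (fun j => some (((loN : Nat) : Int) + j))]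
  rw [List.filter_congr (fun j hj => ?_)]
  · cases ((PySem.List.pyRange (max 0 (((events.drop loN).length : Int) - 10))
        (((events.drop loN).length : Int) - 1) 1).filter
        (fun j => pvIsCtrlk (pvKeyAt (events.drop loN) j)
          && (pvKeyAt (events.drop loN) (j + 1) == "c"))).getLast? <;> rfl
  · have hj0 : (0 : Int) ≤ j := by
      have := (PySem.List.mem_pyRange_one).mp hj
      omega
    rw [pv_keyAtS_eq, pv_keyAtS_eq, ← pv_keyAt_drop events loN j hj0,
        show ((loN : Nat) : Int) + j + 1 = ((loN : Nat) : Int) + (j + 1) by ring,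
        ← pv_keyAt_drop events loN (j + 1) (by omega)]

set_option maxHeartbeats 1000000 in
theorem pv_tail_eq (events : List (List (String × String))) (loN ccN : Nat)
    (hlo : loN ≤ ccN) (hcc : ccN + 2 ≤ events.length) :
    ((specRuns 0 (events.map pvKey)).foldl
      (fun acc r =>
        if r.1 && decide (r.2.1 ≤ ((ccN : Nat) : Int) - 1)
            && decide (((ccN : Nat) : Int) - 1 < r.2.1 + r.2.2) then
          min 29 (((ccN : Nat) : Int) - max r.2.1 ((loN : Nat) : Int))
        else acc) 0)
    = ((min 29 ((((events.drop loN).take (ccN - loN)).reverse.takeWhile pvIsLR).length) : Nat) : Int) := by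
  have hkl : (events.map pvKey).length = events.length := by simp
  have htr : ((((events.drop loN).take (ccN - loN)).reverse).takeWhile pvIsLR).length
      = (((((events.map pvKey).drop loN).take (ccN - loN)).reverse).takeWhile pvIsLRk).length := by
    rw [← pv_twLR_map (((events.drop loN).take (ccN - loN)).reverse)]
    congr 2
    simp
  have hwin := pv_revtw_window pvIsLRk (events.map pvKey) loN ccN (by omega) (by omega)
  rw [pv_foldl_keepval _ _ (specRuns 0 (events.map pvKey)) 0]
  by_cases hc0 : ccN = 0
  · subst hc0
    have hfilt : (specRuns 0 (events.map pvKey)).filter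
        (fun r => r.1 && decide (r.2.1 ≤ ((0 : Nat) : Int) - 1)
          && decide (((0 : Nat) : Int) - 1 < r.2.1 + r.2.2)) = [] := by
      rw [List.filter_eq_nil_iff]
      intro r hr
      have hb := pv_specRuns_bounds (events.map pvKey) (events.map pvKey).length 0 (by omega) r
        (by simpa using hr)
      simp only [Bool.and_eq_true, decide_eq_true_eq]
      rintro ⟨⟨-, h1⟩, -⟩
      omega
    rw [hfilt]
    simp [show loN = 0 by omega]
  · have ht : ccN - 1 < (events.map pvKey).length := by omega
    have hcast : ((ccN : Nat) : Int) - 1 = (((ccN - 1 : Nat)) : Int) := by push_cast; omega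
    rw [hcast]
    have hfilt := pv_filt (events.map pvKey) (ccN - 1) ht (events.map pvKey).length 0
      (by omega) (by omega) (Or.inl rfl)
    simp only [Nat.cast_zero, List.drop_zero] at hfilt
    rw [hfilt]
    -- split keys.take ccN at its last element ccN - 1
    have htk : (events.map pvKey).take ccN
        = (events.map pvKey).take (ccN - 1) ++ [(events.map pvKey)[ccN - 1]'ht] := by
      conv_lhs => rw [show ccN = (ccN - 1) + 1 by omega]
      rw [List.take_add_one, List.getElem?_eq_getElem ht]
      rfl
    have hrevtk : ((events.map pvKey).take ccN).reverse
        = ((events.map pvKey)[ccN - 1]'ht) :: ((events.map pvKey).take (ccN - 1)).reverse := by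
      rw [htk]
      simp
    have hbcle : (((events.map pvKey).take (ccN - 1)).reverse.takeWhile pvIsLRk).length ≤ ccN - 1 := by
      have h1 : (((events.map pvKey).take (ccN - 1)).reverse.takeWhile pvIsLRk).length
          ≤ (((events.map pvKey).take (ccN - 1)).reverse).length := (List.takeWhile_prefix _).length_le
      simp at h1
      omega
    by_cases hflag : pvIsLRk ((events.map pvKey).getD (ccN - 1) "") = true
    · rw [if_pos hflag]
      have hflag' : pvIsLRk ((events.map pvKey)[ccN - 1]'ht) = true := by
        rw [← List.getD_eq_getElem (events.map pvKey) "" ht]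
        exact hflag
      have hbcc : (((events.map pvKey).take ccN).reverse.takeWhile pvIsLRk).length
          = (((events.map pvKey).take (ccN - 1)).reverse.takeWhile pvIsLRk).length + 1 := by
        rw [hrevtk, List.takeWhile_cons, if_pos hflag']
        simp
      rw [htr, hwin, hbcc]
      simp only [List.getLast?_singleton, Option.map_some, Option.getD_some]
      push_cast
      omega
    · rw [if_neg hflag]
      have hflag' : pvIsLRk ((events.map pvKey)[ccN - 1]'ht) = false := by
        rw [← List.getD_eq_getElem (events.map pvKey) "" ht]
        cases hx : pvIsLRk ((events.map pvKey).getD (ccN - 1) "")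
        · rfl
        · exact absurd hx hflag
      have hbcc : (((events.map pvKey).take ccN).reverse.takeWhile pvIsLRk).length = 0 := by
        rw [hrevtk, List.takeWhile_cons, if_neg (by rw [Bool.not_eq_true, hflag'])]
        rfl
      rw [htr, hwin, hbcc]
      simp

set_option maxHeartbeats 4000000 in
theorem pv_B_spec (events : List (List (String × String))) :
    remove_sync_artifacts_alt events = specPipe events := by
  by_cases h10 : events.length < 10
  · unfold remove_sync_artifacts_alt specPipe
    rw [if_pos h10, if_pos h10]
  · simp only [remove_sync_artifacts_alt, specPipe, if_neg h10]
    have hruns0 : rleLoop (events.map pvKey) ((events.length : Nat) : Int) (events.length + 1) 0 []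
        = specRuns 0 (events.map pvKey) := by
      have h := pv_rleLoop_eq (events.map pvKey) ((events.map pvKey).length + 1) 0 []
        (by omega) (by omega)
      simp only [List.length_map, Nat.cast_zero, List.drop_zero, List.nil_append] at h
      exact h
    rw [hruns0, pv_lo_eq events (by omega)]
    set lead := ((events.take 20).takeWhile pvIsLR).length with hlead
    set loN : Nat := (if 4 ≤ lead then lead else 0) with hloN
    have hE1 : (if 4 ≤ lead then events.drop lead else events) = events.drop loN := by
      rw [hloN]
      by_cases h4 : 4 ≤ lead
      · rw [if_pos h4, if_pos h4]
      · rw [if_neg h4, if_neg h4, List.drop_zero]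
    rw [hE1]
    have hleadle : lead ≤ events.length := by
      have h1 : lead ≤ (events.take 20).length := by
        rw [hlead]
        exact (List.takeWhile_prefix _).length_le
      simp at h1
      omega
    have hloLe : loN ≤ events.length := by
      rw [hloN]
      split_ifs <;> omega
    rw [pv_cc_eq events loN hloLe]
    have hn1 : (events.drop loN).length = events.length - loN := by simp
    cases hcc : ((PySem.List.pyRange (max 0 (((events.drop loN).length : Int) - 10))
          (((events.drop loN).length : Int) - 1) 1).filter
        (fun j => pvIsCtrlk (pvKeyAt (events.drop loN) j)
          && (pvKeyAt (events.drop loN) (j + 1) == "c"))).getLast? with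
    | none =>
      simp only [Option.map_none]
      have hm := pv_midfold events loN events.length hloLe (le_refl _) events.length 0 [] (by omega)
      simp only [Nat.cast_zero, List.drop_zero, Nat.zero_max, List.take_length,
        List.nil_append] at hm
      exact hm
    | some c1 =>
      have hmem := pv_mem_of_getLast? hcc
      rw [List.mem_filter] at hmem
      have hb := (PySem.List.mem_pyRange_one).mp hmem.1
      obtain ⟨c1N, rfl⟩ : ∃ k : Nat, c1 = (k : Int) := ⟨c1.toNat, by omega⟩
      have hc1lt : c1N + 1 < events.length - loN := by omega
      simp only [Option.map_some]
      simp only [show (loN : Int) + (c1N : Int) = (((loN + c1N : Nat)) : Int) by push_cast; ring]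
      set ccN := loN + c1N with hccN
      simp only [pv_tail_eq events loN ccN (by omega) (by omega),
        show ccN - loN = c1N from by omega, PySem.List.slice_to_natCast]
      set twN := min 29 ((((events.drop loN).take c1N).reverse.takeWhile pvIsLR).length) with htwN
      have htwle : twN ≤ c1N := by
        have h1 : (((events.drop loN).take c1N).reverse.takeWhile pvIsLR).length
            ≤ (((events.drop loN).take c1N).reverse).length := (List.takeWhile_prefix _).length_le
        simp at h1
        omega
      have hfin : ∀ (cutN : Nat), cutN ≤ twN →
          ((specRuns 0 (events.map pvKey)).foldl
            (fun acc r =>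
              if r.1 && decide (4 ≤ min (r.2.1 + r.2.2) (((ccN - cutN : Nat)) : Int)
                  - max r.2.1 ((loN : Nat) : Int)) then acc
              else acc ++ PySem.List.slice events (some (max r.2.1 ((loN : Nat) : Int)))
                    (some (min (r.2.1 + r.2.2) (((ccN - cutN : Nat)) : Int)))) [])
          = midList ((events.drop loN).take (c1N - cutN)) := by
        intro cutN hcut
        have hm := pv_midfold events loN (ccN - cutN) (by omega) (by omega)
          events.length 0 [] (by omega)
        simp only [Nat.cast_zero, List.drop_zero, Nat.zero_max, List.nil_append] at hm
        rw [hm, List.drop_take, show ccN - cutN - loN = c1N - cutN from by omega]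
      by_cases h4 : 4 ≤ twN
      · rw [if_pos (by exact_mod_cast h4 : (4 : Int) ≤ ((twN : Nat) : Int)), if_pos h4]
        simp only [show ((ccN : Nat) : Int) - ((twN : Nat) : Int) = (((ccN - twN : Nat)) : Int) from by
              push_cast; omega,
            show ((c1N : Nat) : Int) - ((twN : Nat) : Int) = (((c1N - twN : Nat)) : Int) from by
              push_cast; omega,
            PySem.List.slice_to_natCast]
        exact hfin twN (le_refl _)
      · rw [if_neg (by exact_mod_cast h4 : ¬ (4 : Int) ≤ ((twN : Nat) : Int)), if_neg h4]
        simp only [sub_zero,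
            show ((ccN : Nat) : Int) = (((ccN - 0 : Nat)) : Int) from by push_cast; omega,
            PySem.List.slice_to_natCast]
        exact hfin 0 (by omega)

theorem pv_AB_eq (events : List (List (String × String))) :
    remove_sync_artifacts events = remove_sync_artifacts_alt events := by
  rw [pv_A_spec, pv_B_spec]

-- ===== VERDICT (by name: the statement is the Claim_ definition above) =====
theorem remove_sync_artifacts_spec : Claim_equal_remove_sync_artifacts :=
  fun events _ _ => pv_AB_eq events
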